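-- pv_equiv track=rewrite | github.com/Revi1337/BaekJoon-Coding-Test | 백준/Silver/19638. 센티와 마법의 뿅망치/센티와 마법의 뿅망치.py | solution
-- ===== SOURCE A (Python) =====
-- import sys, heapq
--
-- def solution(N, H, T, arr):
--     left = set()
--     t = T
--     pq = []
--     for idx, val in enumerate(arr):
--         if val >= H:
--             left.add(idx)
--         heapq.heappush(pq, [-val, idx])
--
--     while pq and t > 0:
--         val, idx = heapq.heappop(pq)
--         val = -val
--         if val < H:
--             heapq.heappush(pq, [val, idx])
--             break
--
--         if val == 1:
--             heapq.heappush(pq, [1, idx])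
--         else:
--             t -= 1
--             val = val // 2
--             if val < H:
--                 left.discard(idx)
--             heapq.heappush(pq, [-val, idx])
--             if not left:
--                 break
--
--     pq = [-val for val, _ in pq]
--     mx = max(pq)
--     return ('YES', T - t) if mx < H else ('NO', mx)
-- ===== SOURCE B (Python) =====
-- def solution(N, H, T, arr):
--     # Two-queue batched greedy: heights are grouped into run-length (height, count)
--     # classes; 'cur' holds the original classes in descending order and 'nxt' the
--     # halved classes, which are produced in non-increasing order, so the tallest
--     # remaining class is always at one of the two fronts and whole classes are
--     # hammered at once -- no heap and no re-sorting.
--     cur = []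
--     for v in sorted(arr, reverse=True):
--         if cur and cur[-1][0] == v:
--             cur[-1][1] += 1
--         else:
--             cur.append([v, 1])
--     nxt = []
--     i = j = 0
--     t = T
--     while t > 0:
--         if i < len(cur) and (j >= len(nxt) or cur[i][0] >= nxt[j][0]):
--             q, k = cur, i
--         else:
--             q, k = nxt, j
--         m, c = q[k]
--         if m < H or m == 1:
--             break
--         if c <= t:
--             t -= c
--             if q is cur:
--                 i += 1
--             else:
--                 j += 1
--             nxt.append([m // 2, c])
--         else:
--             q[k][1] = c - t
--             nxt.append([m // 2, t])
--             t = 0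
--     if i < len(cur) and (j >= len(nxt) or cur[i][0] >= nxt[j][0]):
--         mx = cur[i][0]
--     else:
--         mx = nxt[j][0]
--     return ('YES', T - t) if mx < H else ('NO', mx)
-- ===== Notes on version B (the rewrite author's own statement) =====
-- stated objective: faster
-- what changed: A simulates every hammer blow with one heap pop/push plus a 'left' index set; B sorts once, groups equal heights into run-length (height, count) classes and processes a whole class per step using two front-consumed queues (original classes, and halved classes which come out in non-increasing order), so it needs no heap and no re-sorting at all. …
-- outside the precondition, e.g. on solution(2, 2, 1, [-5, -7]): A returns ('NO', 5), B returns ('YES', 0); on solution(2, 0, 3, [0, 1]): A returns ('NO', 0), B returns ('NO', 1); on solution(2, 1, 2, [1, 0]): A returns ('YES', 0), B returns ('NO', 1)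
import Mathlib
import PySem

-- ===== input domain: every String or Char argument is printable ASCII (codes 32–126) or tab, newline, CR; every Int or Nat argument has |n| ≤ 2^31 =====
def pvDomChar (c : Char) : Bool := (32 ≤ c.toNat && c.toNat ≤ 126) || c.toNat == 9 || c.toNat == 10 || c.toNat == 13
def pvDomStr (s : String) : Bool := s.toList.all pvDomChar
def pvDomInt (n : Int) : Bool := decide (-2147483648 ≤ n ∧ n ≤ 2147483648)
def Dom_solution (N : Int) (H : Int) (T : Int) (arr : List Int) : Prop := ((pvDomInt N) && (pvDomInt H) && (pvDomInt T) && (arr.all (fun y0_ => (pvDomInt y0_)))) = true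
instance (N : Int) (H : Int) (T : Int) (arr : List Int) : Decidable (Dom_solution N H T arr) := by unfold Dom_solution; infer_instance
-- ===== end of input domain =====

-- B replaces A's one-heap-operation-per-hammer-blow loop by a batched greedy over
-- run-length (height, count) classes, so B's loop count is independent of T; the
-- return values are proved identical on the problem's domain (nonempty arr, H ≥ 1,
-- all heights ≥ 1).

-- ===== PORT A =====
-- heapq is ported at its priority-queue contract: heappush adds the pair, heappop removes the
-- lexicographically least [key, idx] pair. The heap's internal array order is not observable in
-- A — A only pops minima and finally takes max() over the content — so pq is a plain list.
def pvLexLe (p q : Int × Int) : Bool := decide (p.1 < q.1) || (p.1 == q.1 && decide (p.2 ≤ q.2))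

def pvHeapMin (x : Int × Int) (xs : List (Int × Int)) : Int × Int :=
  xs.foldl (fun a b => if pvLexLe b a then b else a) x

-- used by loopA's termination proof
theorem pvHeapMin_mem (x : Int × Int) (xs : List (Int × Int)) : pvHeapMin x xs ∈ x :: xs := by
  induction xs generalizing x with
  | nil => simp [pvHeapMin]
  | cons y ys ih =>
    have h := ih (if pvLexLe y x then y else x)
    rw [List.mem_cons] at h
    simp only [pvHeapMin, List.foldl_cons] at h ⊢
    rcases h with h | h
    · rw [h]; split <;> simp
    · simp [h]

-- used by loopA's termination proof
theorem pvCountFlag (x : Int × Int) (xs : List (Int × Int)) (m : Int × Int)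
    (hm : m ∈ x :: xs) (h1 : m.1 = -1) :
    (((x :: xs).erase m ++ [((1 : Int), m.2)]).countP (fun p => p.1 = -1)) <
      ((x :: xs).countP (fun p => p.1 = -1)) := by
  have hp := (List.perm_cons_erase hm).countP_eq (fun p => decide (p.1 = -1))
  simp only [List.countP_cons, List.countP_append, h1, decide_eq_true_eq] at *
  simp only [hp, h1]
  norm_num

-- the while loop of A (state: pq, left, t); returns the final (pq, t)
def loopA (H : Int) (pq : List (Int × Int)) (left : PySem.Set Int) (t : Int) :
    List (Int × Int) × Int :=
  match pq with
  | [] => ([], t)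
  | x :: xs =>
    if ht : t ≤ 0 then (x :: xs, t)
    else
      let m := pvHeapMin x xs
      let rest := (x :: xs).erase m
      let val := -m.1
      if val < H then (rest ++ [(val, m.2)], t)
      else if hval : val = 1 then
        have h1 : m.1 = -1 := by omega
        loopA H (rest ++ [((1 : Int), m.2)]) left t
      else
        let v2 := PySem.Int.floordiv val 2
        let left' := if v2 < H then PySem.Set.discard left m.2 else left
        let pq' := rest ++ [(-v2, m.2)]
        if left' = [] then (pq', t - 1)
        else loopA H pq' left' (t - 1)
termination_by ((t.toNat, (pq.countP (fun p => p.1 = -1))) : Nat × Nat)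
decreasing_by
  · exact Prod.Lex.right _ (pvCountFlag x xs _ (pvHeapMin_mem x xs) h1)
  · exact Prod.Lex.left _ _ (by omega)

def solution (N : Int) (H : Int) (T : Int) (arr : List Int) : String × Int :=
  let init := (PySem.List.enumerate arr 0).foldl
      (fun (st : PySem.Set Int × List (Int × Int)) p =>
        ((if H ≤ p.2 then PySem.Set.add st.1 p.1 else st.1), st.2 ++ [(-p.2, p.1)]))
      (PySem.Set.empty, [])
  let r := loopA H init.2 init.1 T
  match PySem.List.max? (r.1.map (fun p => -p.1)) (fun v => v) with
  | none => ("", 0)   -- empty arr: Python raises ValueError here (excluded by Pre_)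
  | some mx => if mx < H then ("YES", T - r.2) else ("NO", mx)

-- ===== PORT B =====
-- Source B's class builder: run-length (height, count) classes of sorted(arr, reverse=True),
-- appended at the back (counts are Python ints, carried as Nat; they are always ≥ 1)
def buildRL (arr : List Int) : List (Int × Nat) :=
  (PySem.List.sorted arr (fun v => v) true).foldl
    (fun cs v =>
      match cs.getLast? with
      | some (w, c) => if w = v then cs.dropLast ++ [(v, c + 1)] else cs ++ [(v, 1)]
      | none => [(v, 1)]) []

-- the while loop of B. Python consumes cur/nxt from the front via the indices i/j and
-- appends to nxt at the back; the port carries the remaining queues cur[i:] and nxt[j:]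
-- directly. The (·, 0)-count arms are unreachable totality cases (built counts are ≥ 1).
def loopB (H : Int) : List (Int × Nat) → List (Int × Nat) → Int →
    List (Int × Nat) × List (Int × Nat) × Int
  | cur, nxt, t =>
    if t ≤ 0 then (cur, nxt, t)
    else
      match cur, nxt with
      | [], [] => ([], [], t)
      | (_, 0) :: cur', nxt => loopB H cur' nxt t
      | cur, (_, 0) :: nxt' => loopB H cur nxt' t
      | (m, c + 1) :: cur', [] =>
        if m < H ∨ m = 1 then ((m, c + 1) :: cur', [], t)
        else if ((c : Int) + 1) ≤ t then
          loopB H cur' [(PySem.Int.floordiv m 2, c + 1)] (t - ((c : Int) + 1))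
        else ((m, (c + 1) - t.toNat) :: cur', [(PySem.Int.floordiv m 2, t.toNat)], 0)
      | [], (m2, c2 + 1) :: nxt' =>
        if m2 < H ∨ m2 = 1 then ([], (m2, c2 + 1) :: nxt', t)
        else if ((c2 : Int) + 1) ≤ t then
          loopB H [] (nxt' ++ [(PySem.Int.floordiv m2 2, c2 + 1)]) (t - ((c2 : Int) + 1))
        else ([], (m2, (c2 + 1) - t.toNat) :: (nxt' ++ [(PySem.Int.floordiv m2 2, t.toNat)]), 0)
      | (m, c + 1) :: cur', (m2, c2 + 1) :: nxt' =>
        if m2 ≤ m then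
          if m < H ∨ m = 1 then ((m, c + 1) :: cur', (m2, c2 + 1) :: nxt', t)
          else if ((c : Int) + 1) ≤ t then
            loopB H cur' (((m2, c2 + 1) :: nxt') ++ [(PySem.Int.floordiv m 2, c + 1)])
              (t - ((c : Int) + 1))
          else ((m, (c + 1) - t.toNat) :: cur',
                ((m2, c2 + 1) :: nxt') ++ [(PySem.Int.floordiv m 2, t.toNat)], 0)
        else
          if m2 < H ∨ m2 = 1 then ((m, c + 1) :: cur', (m2, c2 + 1) :: nxt', t)
          else if ((c2 : Int) + 1) ≤ t then
            loopB H ((m, c + 1) :: cur') (nxt' ++ [(PySem.Int.floordiv m2 2, c2 + 1)])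
              (t - ((c2 : Int) + 1))
          else ((m, c + 1) :: cur',
                (m2, (c2 + 1) - t.toNat) :: (nxt' ++ [(PySem.Int.floordiv m2 2, t.toNat)]), 0)
termination_by cur nxt t => ((t.toNat, cur.length + nxt.length) : Nat × Nat)
decreasing_by
  · exact Prod.Lex.right _ (by simp)
  · exact Prod.Lex.right _ (by simp)
  · exact Prod.Lex.left _ _ (by omega)
  · exact Prod.Lex.left _ _ (by omega)
  · exact Prod.Lex.left _ _ (by omega)
  · exact Prod.Lex.left _ _ (by omega)

def solution_alt (N : Int) (H : Int) (T : Int) (arr : List Int) : String × Int :=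
  let r := loopB H (buildRL arr) [] T
  match r.1, r.2.1 with
  | [], [] => ("", 0)   -- empty arr: Python raises IndexError here (excluded by Pre_)
  | (m, _) :: _, [] => if m < H then ("YES", T - r.2.2) else ("NO", m)
  | [], (m2, _) :: _ => if m2 < H then ("YES", T - r.2.2) else ("NO", m2)
  | (m, _) :: _, (m2, _) :: _ =>
    if m2 ≤ m then (if m < H then ("YES", T - r.2.2) else ("NO", m))
    else (if m2 < H then ("YES", T - r.2.2) else ("NO", m2))

-- ===== PRECONDITION & SPEC =====
-- Pre_ excludes: the empty list (A raises ValueError at max()); and, when T ≥ 1 (so the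
-- hammer loop actually runs): H ≤ 0, and H = 1 with a height ≤ 0 (outside the problem's
-- guaranteed domain, where A's value is an artefact of its sentinel parking of height-1
-- giants under a positive heap key), and every height ≤ -H (where A re-pushes the popped
-- maximum negated and reports that sentinel as the final maximum).
def Pre_solution (N : Int) (H : Int) (T : Int) (arr : List Int) : Prop :=
  arr ≠ [] ∧ (1 ≤ T →
    1 ≤ H ∧ (H = 1 → ∀ v ∈ arr, 1 ≤ v) ∧ ¬(∀ v ∈ arr, v ≤ -H))
instance (N : Int) (H : Int) (T : Int) (arr : List Int) : Decidable (Pre_solution N H T arr) := by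
  unfold Pre_solution; infer_instance

def pvWitness_solution : Int × Int × Int × List Int := (3, 2, 4, [5, 1, 7])

def Spec_solution (N : Int) (H : Int) (T : Int) (arr : List Int) (out : String × Int) : Prop := out = solution_alt N H T arr
instance (N : Int) (H : Int) (T : Int) (arr : List Int) (out : String × Int) : Decidable (Spec_solution N H T arr out) := by unfold Spec_solution; infer_instance

-- ===== CLAIM (what is proved, stated in full; the proofs are below) =====
def Claim_equal_solution : Prop := ∀ (N : Int) (H : Int) (T : Int) (arr : List Int), Dom_solution N H T arr → Pre_solution N H T arr → Spec_solution N H T arr (solution N H T arr)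

-- ===== LEMMAS AND PROOFS =====

theorem pvHeapMin_le (x : Int × Int) (xs : List (Int × Int)) :
    ∀ y ∈ x :: xs, (pvHeapMin x xs).1 ≤ y.1 := by
  induction xs generalizing x with
  | nil => simp [pvHeapMin]
  | cons y ys ih =>
    intro z hz
    have hfx : (if pvLexLe y x then y else x).1 ≤ x.1 ∧ (if pvLexLe y x then y else x).1 ≤ y.1 := by
      simp only [pvLexLe, Bool.or_eq_true, Bool.and_eq_true, decide_eq_true_eq, beq_iff_eq]
      split <;> rename_i hc <;> simp_all <;> omega
    have h := ih (if pvLexLe y x then y else x)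
    simp only [pvHeapMin, List.foldl_cons] at h ⊢
    rw [List.mem_cons, List.mem_cons] at hz
    rcases hz with rfl | rfl | hz
    · exact le_trans (h _ (by simp)) hfx.1
    · exact le_trans (h _ (by simp)) hfx.2
    · exact h _ (by simp [hz])

-- the common abstraction: the multiset of current heights, as a descending list
def expandRL (cs : List (Int × Nat)) : List Int := cs.flatMap (fun p => List.replicate p.2 p.1)

def insD (v : Int) : List Int → List Int
  | [] => [v]
  | x :: xs => if v < x then x :: insD v xs else v :: x :: xs

-- reference loop: one hammer blow at a time on the descending height list
def loopM (H : Int) : List Int → Int → List Int × Int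
  | [], t => ([], t)
  | v :: vs, t =>
    if t ≤ 0 then (v :: vs, t)
    else if v < H then (v :: vs, t)
    else if v = 1 then (v :: vs, t)
    else loopM H (insD (PySem.Int.floordiv v 2) vs) (t - 1)
termination_by ys t => t.toNat
decreasing_by omega

-- answer abstraction: (some (true, t') = "YES with final t'", some (false, mx) = "NO with max mx")
def outA (H : Int) (r : List (Int × Int) × Int) : Option (Bool × Int) :=
  (PySem.List.max? (r.1.map (fun p => -p.1)) (fun v => v)).map
    (fun mx => if mx < H then (true, r.2) else (false, mx))

def outM (H : Int) (r : List Int × Int) : Option (Bool × Int) :=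
  match r.1 with
  | [] => none
  | m :: _ => some (if m < H then (true, r.2) else (false, m))

def outB (H : Int) (r : List (Int × Nat) × List (Int × Nat) × Int) : Option (Bool × Int) :=
  match r.1, r.2.1 with
  | [], [] => none
  | (m, _) :: _, [] => some (if m < H then (true, r.2.2) else (false, m))
  | [], (m2, _) :: _ => some (if m2 < H then (true, r.2.2) else (false, m2))
  | (m, _) :: _, (m2, _) :: _ =>
    if m2 ≤ m then some (if m < H then (true, r.2.2) else (false, m))
    else some (if m2 < H then (true, r.2.2) else (false, m2))

theorem max?_of_bounds (l : List Int) (v : Int) (hv : v ∈ l) (hb : ∀ x ∈ l, x ≤ v) :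
    PySem.List.max? l (fun y => y) = some v := by
  cases h : PySem.List.max? l (fun y => y) with
  | none => rw [PySem.List.max?_eq_none_iff] at h; subst h; cases hv
  | some m =>
    have hm : m ∈ l := PySem.List.max?_mem h
    have hmax := PySem.List.max?_isMax h
    have : m = v := le_antisymm (hb m hm) (hmax v hv)
    rw [this]


-- ---- insD facts ----
theorem insD_ne_nil (v : Int) (l : List Int) : insD v l ≠ [] := by
  cases l with
  | nil => simp [insD]
  | cons x xs => unfold insD; split <;> simp


theorem insD_perm (v : Int) (l : List Int) : (insD v l).Perm (v :: l) := by
  induction l with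
  | nil => simp [insD]
  | cons x xs ih =>
    unfold insD
    split
    · exact (ih.cons x).trans (List.Perm.swap v x xs)
    · exact List.Perm.refl _


theorem insD_desc (v : Int) (l : List Int) (h : l.Pairwise (fun a b => b ≤ a)) :
    (insD v l).Pairwise (fun a b => b ≤ a) := by
  induction l with
  | nil => simp [insD]
  | cons x xs ih =>
    rw [List.pairwise_cons] at h
    unfold insD
    split
    · rename_i hlt
      rw [List.pairwise_cons]
      refine ⟨?_, ih h.2⟩
      intro a ha
      rcases List.mem_cons.mp ((insD_perm v xs).mem_iff.mp ha) with rfl | hxs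
      · omega
      · exact h.1 a hxs
    · rename_i hge
      rw [List.pairwise_cons]
      refine ⟨?_, List.pairwise_cons.mpr h⟩
      intro a ha
      rcases List.mem_cons.mp ha with rfl | hxs
      · omega
      · exact le_trans (h.1 a hxs) (by omega)


theorem insD_run (v m : Int) (h : v < m) (k : Nat) (E : List Int) :
    insD v (List.replicate k m ++ E) = List.replicate k m ++ insD v E := by
  induction k with
  | zero => simp
  | succ k ih => simp [List.replicate_succ, insD, h, ih]




-- ---- expand / insertRL / builder ----




-- ---- loopM facts ----
theorem loopM_ne_nil (H : Int) (ys : List Int) (t : Int) (h : ys ≠ []) :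
    (loopM H ys t).1 ≠ [] := by
  suffices hs : ∀ (n : Nat) (ys : List Int) (t : Int), t.toNat ≤ n → ys ≠ [] →
      (loopM H ys t).1 ≠ [] from hs t.toNat ys t le_rfl h
  intro n
  induction n with
  | zero =>
    intro ys t hle hne
    cases ys with
    | nil => exact absurd rfl hne
    | cons v vs => rw [loopM]; rw [if_pos (by omega)]; simp
  | succ n ih =>
    intro ys t hle hne
    cases ys with
    | nil => exact absurd rfl hne
    | cons v vs =>
      rw [loopM]
      split
      · simp
      · split
        · simp
        · split
          · simp
          · exact ih _ _ (by omega) (insD_ne_nil _ _)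


theorem loopM_batch (H m : Int) (hm2 : 2 ≤ m) (hmH : H ≤ m) (c : Nat) :
    ∀ (E : List Int) (t : Int), 1 ≤ t →
    loopM H (List.replicate (c + 1) m ++ E) t =
      if ((c : Int) + 1) ≤ t then
        loopM H ((insD (PySem.Int.floordiv m 2))^[c + 1] E) (t - ((c : Int) + 1))
      else ((insD (PySem.Int.floordiv m 2))^[t.toNat]
              (List.replicate ((c + 1) - t.toNat) m ++ E), 0) := by
  induction c with
  | zero =>
    intro E t ht
    rw [show List.replicate (0 + 1) m ++ E = m :: E by simp]
    rw [loopM]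
    rw [if_neg (by omega : ¬ t ≤ 0), if_neg (by omega : ¬ m < H), if_neg (by omega : ¬ m = 1)]
    rw [if_pos (show ((0 : Nat) : Int) + 1 ≤ t by push_cast; omega)]
    simp
  | succ c ih =>
    intro E t ht
    have hfdlt : PySem.Int.floordiv m 2 < m := by
      rw [PySem.Int.floordiv_eq_ediv_of_pos (by omega)]; omega
    rw [show List.replicate (c + 1 + 1) m ++ E = m :: (List.replicate (c + 1) m ++ E) by
      simp [List.replicate_succ]]
    rw [loopM, if_neg (by omega : ¬ t ≤ 0), if_neg (by omega : ¬ m < H), if_neg (by omega : ¬ m = 1)]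
    rw [insD_run _ _ hfdlt]
    by_cases h2 : 1 ≤ t - 1
    · rw [ih (insD (PySem.Int.floordiv m 2) E) (t - 1) h2]
      split_ifs with ha hb hb
      · rw [← Function.iterate_succ_apply]
        congr 1
        push_cast at ha hb ⊢
        omega
      · exfalso; push_cast at ha hb; omega
      · exfalso; push_cast at ha hb; omega
      · have hkey : List.replicate (c + 1 - (t - 1).toNat) m ++ insD (PySem.Int.floordiv m 2) E
            = insD (PySem.Int.floordiv m 2) (List.replicate (c + 1 - (t - 1).toNat) m ++ E) := by
          rw [insD_run _ _ hfdlt]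
        rw [hkey, ← Function.iterate_succ_apply]
        have e1 : (t - 1).toNat + 1 = t.toNat := by omega
        have e2 : c + 1 - (t - 1).toNat = c + 1 + 1 - t.toNat := by omega
        simp only [Nat.succ_eq_add_one]
        rw [e1, e2]
    · have ht1 : t = 1 := by omega
      subst ht1
      rw [show (1 : Int) - 1 = 0 from rfl]
      rw [show List.replicate (c + 1) m ++ insD (PySem.Int.floordiv m 2) E
          = m :: (List.replicate c m ++ insD (PySem.Int.floordiv m 2) E) by
        simp [List.replicate_succ]]
      rw [loopM, if_pos (by omega : (0 : Int) ≤ 0)]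
      rw [if_neg (show ¬ (((c + 1 : Nat) : Int) + 1 ≤ 1) by push_cast; omega)]
      rw [show (1 : Int).toNat = 1 from rfl, Function.iterate_one]
      rw [show c + 1 + 1 - 1 = c + 1 from rfl]
      rw [insD_run _ _ hfdlt]
      rw [show List.replicate (c + 1) m ++ insD (PySem.Int.floordiv m 2) E
          = m :: (List.replicate c m ++ insD (PySem.Int.floordiv m 2) E) by
        simp [List.replicate_succ]]


-- ---- B's loop follows the reference loop ----


-- ---- A's loop follows the reference loop ----
theorem expandRL_cons (m : Int) (c : Nat) (rest : List (Int × Nat)) :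
    expandRL ((m, c) :: rest) = List.replicate c m ++ expandRL rest := by
  simp [expandRL]

theorem expandRL_append (a b : List (Int × Nat)) :
    expandRL (a ++ b) = expandRL a ++ expandRL b := by
  simp [expandRL]

theorem head_le_of_desc {v : Int} {vs : List Int} (h : (v :: vs).Pairwise (fun a b => b ≤ a)) :
    ∀ y ∈ v :: vs, y ≤ v := by
  intro y hy
  rcases List.mem_cons.mp hy with rfl | hy2
  · exact le_refl y
  · exact (List.pairwise_cons.mp h).1 y hy2

theorem mem_expand_of_mem (cs : List (Int × Nat)) (p : Int × Nat) (hp : p ∈ cs)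
    (hc : 1 ≤ p.2) : p.1 ∈ expandRL cs := by
  simp only [expandRL, List.mem_flatMap]
  exact ⟨p, hp, List.mem_replicate.mpr ⟨by omega, rfl⟩⟩

theorem mem_of_mem_expand (cs : List (Int × Nat)) (y : Int) (hy : y ∈ expandRL cs) :
    ∃ p ∈ cs, y = p.1 := by
  simp only [expandRL, List.mem_flatMap] at hy
  obtain ⟨p, hp, hy2⟩ := hy
  exact ⟨p, hp, List.eq_of_mem_replicate hy2⟩

theorem expand_eq_nil (cs : List (Int × Nat)) (hc : ∀ p ∈ cs, 1 ≤ p.2)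
    (h : expandRL cs = []) : cs = [] := by
  cases cs with
  | nil => rfl
  | cons p rest =>
    exfalso
    obtain ⟨m, c⟩ := p
    rw [expandRL_cons, List.append_eq_nil_iff, List.replicate_eq_nil_iff] at h
    have := hc (m, c) (by simp)
    simp at this
    omega

theorem expand_head_bound (m : Int) (c : Nat) (cur' : List (Int × Nat)) (hc : 1 ≤ c)
    (hd : (expandRL ((m, c) :: cur')).Pairwise (fun a b => b ≤ a)) :
    ∀ y ∈ expandRL ((m, c) :: cur'), y ≤ m := by
  obtain ⟨c', rfl⟩ : ∃ c', c = c' + 1 := ⟨c - 1, by omega⟩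
  rw [expandRL_cons, List.replicate_succ, List.cons_append] at hd ⊢
  exact head_le_of_desc hd

theorem insD_iter_perm (v : Int) (k : Nat) (l : List Int) :
    ((insD v)^[k] l).Perm (List.replicate k v ++ l) := by
  induction k generalizing l with
  | zero => simp
  | succ k ih =>
    rw [Function.iterate_succ_apply]
    refine (ih (insD v l)).trans ?_
    refine (List.Perm.append_left _ (insD_perm v l)).trans ?_
    rw [show List.replicate k v ++ v :: l = List.replicate (k + 1) v ++ l by
      simp [List.replicate_succ', List.append_assoc]]

theorem insD_iter_desc (v : Int) (k : Nat) (l : List Int)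
    (h : l.Pairwise (fun a b => b ≤ a)) :
    ((insD v)^[k] l).Pairwise (fun a b => b ≤ a) := by
  induction k generalizing l with
  | zero => simpa
  | succ k ih =>
    rw [Function.iterate_succ_apply]
    exact ih _ (insD_desc v l h)

theorem repl_decomp (m : Int) : ∀ (c : Nat) (ys : List Int),
    ys.Pairwise (fun a b => b ≤ a) → (∀ y ∈ ys, y ≤ m) → c ≤ ys.count m →
    ∃ E, ys = List.replicate c m ++ E := by
  intro c
  induction c with
  | zero => intro ys _ _ _; exact ⟨ys, rfl⟩
  | succ c ih =>
    intro ys hys hb hcount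
    have hmem : m ∈ ys := List.count_pos_iff.mp (by omega)
    cases ys with
    | nil => simp at hmem
    | cons y ys' =>
      have hym : y = m := by
        have h1 := hb y (by simp)
        have h2 : m ≤ y := head_le_of_desc hys m hmem
        omega
      subst hym
      rw [List.count_cons_self] at hcount
      obtain ⟨E, hE⟩ := ih ys' (List.pairwise_cons.mp hys).2
        (fun z hz => hb z (List.mem_cons_of_mem _ hz)) (by omega)
      exact ⟨E, by rw [List.replicate_succ, List.cons_append, hE]⟩

theorem expandRL_nil : expandRL [] = [] := rfl

theorem desc_replicate (n : Nat) (a : Int) :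
    (List.replicate n a).Pairwise (fun x y : Int => y ≤ x) := by
  induction n with
  | zero => simp
  | succ n ih =>
    rw [List.replicate_succ, List.pairwise_cons]
    exact ⟨fun y hy => le_of_eq (List.eq_of_mem_replicate hy), ih⟩

theorem fd2_mono (a b : Int) (h : a ≤ b) :
    PySem.Int.floordiv a 2 ≤ PySem.Int.floordiv b 2 := by
  rw [PySem.Int.floordiv_eq_ediv_of_pos (by norm_num),
    PySem.Int.floordiv_eq_ediv_of_pos (by norm_num)]
  omega

theorem fd2_le_self (a : Int) (h : 0 ≤ a) : PySem.Int.floordiv a 2 ≤ a := by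
  rw [PySem.Int.floordiv_eq_ediv_of_pos (by norm_num)]
  omega

theorem ys_head (sel : Int) (A ys : List Int) (hin : sel ∈ A) (hub : ∀ y ∈ A, y ≤ sel)
    (hperm : A.Perm ys) (hys : ys.Pairwise (fun a b => b ≤ a)) :
    ∃ vs, ys = sel :: vs := by
  cases ys with
  | nil => exact absurd (hperm.mem_iff.mp hin) (by simp)
  | cons v vs =>
    have h1 : sel ≤ v := head_le_of_desc hys sel (hperm.mem_iff.mp hin)
    have h2 : v ≤ sel := hub v (hperm.mem_iff.mpr (by simp))
    exact ⟨vs, by rw [le_antisymm h2 h1]⟩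

theorem loopM_stop0 (H : Int) (ys : List Int) (t : Int) (ht : t ≤ 0) :
    loopM H ys t = (ys, t) := by
  cases ys with
  | nil => simp [loopM]
  | cons v vs => rw [loopM, if_pos ht]

-- the maintained facts about the nxt queue after appending the halved class (fd v, k)
theorem newnxt_inv (v : Int) (k : Nat) (hk : 1 ≤ k) (hv2 : 2 ≤ v)
    (A B0 : List (Int × Nat))
    (hcB : ∀ p ∈ B0, 1 ≤ p.2)
    (hdB : (expandRL B0).Pairwise (fun a b => b ≤ a))
    (hball : ∀ p ∈ A ++ B0, p.1 ≤ v)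
    (hbB : ∀ p ∈ A ++ B0, ∀ q ∈ B0, PySem.Int.floordiv p.1 2 ≤ q.1)
    (hfdq : ∀ q ∈ B0, PySem.Int.floordiv v 2 ≤ q.1) :
    (∀ p ∈ B0 ++ [(PySem.Int.floordiv v 2, k)], 1 ≤ p.2) ∧
    ((expandRL (B0 ++ [(PySem.Int.floordiv v 2, k)])).Pairwise (fun a b => b ≤ a)) ∧
    (∀ p ∈ A ++ (B0 ++ [(PySem.Int.floordiv v 2, k)]),
       ∀ q ∈ B0 ++ [(PySem.Int.floordiv v 2, k)], PySem.Int.floordiv p.1 2 ≤ q.1) := by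
  have hfd1 : 1 ≤ PySem.Int.floordiv v 2 := by
    rw [PySem.Int.floordiv_eq_ediv_of_pos (by norm_num)]
    omega
  refine ⟨?_, ?_, ?_⟩
  · intro p hp
    rcases List.mem_append.mp hp with h | h
    · exact hcB p h
    · rw [List.mem_singleton] at h
      subst h
      exact hk
  · rw [expandRL_append]
    rw [List.pairwise_append]
    refine ⟨hdB, ?_, ?_⟩
    · rw [show expandRL [(PySem.Int.floordiv v 2, k)]
          = List.replicate k (PySem.Int.floordiv v 2) from by simp [expandRL]]
      exact desc_replicate _ _
    · intro a ha b hb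
      obtain ⟨q, hq, rfl⟩ := mem_of_mem_expand _ _ ha
      rw [show expandRL [(PySem.Int.floordiv v 2, k)]
          = List.replicate k (PySem.Int.floordiv v 2) from by simp [expandRL]] at hb
      rw [List.eq_of_mem_replicate hb]
      exact hfdq q hq
  · intro p hp q hq
    rcases List.mem_append.mp hq with hq1 | hq2
    · rcases List.mem_append.mp hp with hp1 | hp2
      · exact hbB p (List.mem_append_left _ hp1) q hq1
      · rcases List.mem_append.mp hp2 with hp3 | hp4
        · exact hbB p (List.mem_append_right _ hp3) q hq1
        · rw [List.mem_singleton] at hp4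
          subst hp4
          exact le_trans (fd2_le_self _ (by omega)) (hfdq q hq1)
    · rw [List.mem_singleton] at hq2
      subst hq2
      rcases List.mem_append.mp hp with hp1 | hp2
      · exact fd2_mono _ _ (hball p (List.mem_append_left _ hp1))
      · rcases List.mem_append.mp hp2 with hp3 | hp4
        · exact fd2_mono _ _ (hball p (List.mem_append_right _ hp3))
        · rw [List.mem_singleton] at hp4
          subst hp4
          exact fd2_le_self _ (by omega)

theorem expand_buildRL (arr : List Int) :
    expandRL (buildRL arr) = PySem.List.sorted arr (fun v => v) true := by
  have step : ∀ (cs : List (Int × Nat)) (v : Int),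
      expandRL (match cs.getLast? with
        | some (w, c) => if w = v then cs.dropLast ++ [(v, c + 1)] else cs ++ [(v, 1)]
        | none => [(v, 1)]) = expandRL cs ++ [v] := by
    intro cs v
    match hL : cs.getLast? with
    | none =>
      rw [List.getLast?_eq_none_iff.mp hL]
      simp [expandRL]
    | some wc =>
      obtain ⟨w, c⟩ := wc
      obtain ⟨ds, rfl⟩ := List.getLast?_eq_some_iff.mp hL
      dsimp only
      by_cases hwv : w = v
      · subst hwv
        rw [if_pos rfl, List.dropLast_concat]
        simp [expandRL, List.replicate_succ']
      · rw [if_neg hwv]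
        simp [expandRL]
  have main : ∀ (l : List Int) (cs : List (Int × Nat)),
      expandRL (l.foldl (fun cs v => match cs.getLast? with
        | some (w, c) => if w = v then cs.dropLast ++ [(v, c + 1)] else cs ++ [(v, 1)]
        | none => [(v, 1)]) cs) = expandRL cs ++ l := by
    intro l
    induction l with
    | nil => intro cs; simp
    | cons v l ih => intro cs; rw [List.foldl_cons, ih, step]; simp
  rw [buildRL, main]
  simp [expandRL]


theorem counts_buildRL (arr : List Int) : ∀ p ∈ buildRL arr, 1 ≤ p.2 := by
  have step : ∀ (cs : List (Int × Nat)) (v : Int), (∀ p ∈ cs, 1 ≤ p.2) →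
      ∀ p ∈ (match cs.getLast? with
        | some (w, c) => if w = v then cs.dropLast ++ [(v, c + 1)] else cs ++ [(v, 1)]
        | none => [(v, 1)]), 1 ≤ p.2 := by
    intro cs v h p
    match hL : cs.getLast? with
    | none =>
      intro hp
      simp at hp
      rw [hp]
    | some wc =>
      obtain ⟨w, c⟩ := wc
      obtain ⟨ds, rfl⟩ := List.getLast?_eq_some_iff.mp hL
      dsimp only
      by_cases hwv : w = v
      · subst hwv
        rw [if_pos rfl, List.dropLast_concat]
        intro hp
        rcases List.mem_append.mp hp with h1 | h1
        · exact h p (List.mem_append_left _ h1)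
        · simp at h1
          rw [h1]
          simp
      · rw [if_neg hwv]
        intro hp
        rcases List.mem_append.mp hp with h1 | h1
        · exact h p h1
        · simp at h1
          rw [h1]
  have main : ∀ (l : List Int) (cs : List (Int × Nat)), (∀ p ∈ cs, 1 ≤ p.2) →
      ∀ p ∈ l.foldl (fun cs v => match cs.getLast? with
        | some (w, c) => if w = v then cs.dropLast ++ [(v, c + 1)] else cs ++ [(v, 1)]
        | none => [(v, 1)]) cs, 1 ≤ p.2 := by
    intro l
    induction l with
    | nil => intro cs h; exact h
    | cons v l ih =>
      intro cs h
      rw [List.foldl_cons]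
      exact ih _ (step cs v h)
  exact main _ [] (by simp)


theorem outB_stop (H : Int) (cur nxt : List (Int × Nat)) (t : Int) (ys : List Int)
    (hcc : ∀ p ∈ cur, 1 ≤ p.2) (hcn : ∀ p ∈ nxt, 1 ≤ p.2)
    (hdc : (expandRL cur).Pairwise (fun a b => b ≤ a))
    (hdn : (expandRL nxt).Pairwise (fun a b => b ≤ a))
    (hperm : (expandRL cur ++ expandRL nxt).Perm ys)
    (hys : ys.Pairwise (fun a b => b ≤ a)) :
    outB H (cur, nxt, t) = outM H (ys, t) := by
  cases ys with
  | nil =>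
    have h0 : expandRL cur ++ expandRL nxt = [] := hperm.eq_nil
    obtain ⟨e1, e2⟩ := List.append_eq_nil_iff.mp h0
    rw [expand_eq_nil cur hcc e1, expand_eq_nil nxt hcn e2]
    rfl
  | cons v vs =>
    have hvmax := head_le_of_desc hys
    have hvin : v ∈ expandRL cur ++ expandRL nxt := hperm.mem_iff.mpr (by simp)
    cases cur with
    | nil =>
      cases nxt with
      | nil =>
        exfalso
        rw [expandRL_nil] at hvin
        simp at hvin
      | cons p2 nxt' =>
        obtain ⟨m2, c2⟩ := p2
        have hc2 : 1 ≤ c2 := hcn (m2, c2) (by simp)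
        have h1 : m2 ≤ v := hvmax m2 (hperm.mem_iff.mp
          (List.mem_append_right _ (mem_expand_of_mem _ (m2, c2) (by simp) hc2)))
        have h2 : v ≤ m2 := by
          rcases List.mem_append.mp hvin with hv1 | hv2
          · rw [expandRL_nil] at hv1; simp at hv1
          · exact expand_head_bound m2 c2 nxt' hc2 hdn v hv2
        have hmv : m2 = v := le_antisymm h1 h2
        unfold outB outM
        dsimp only
        rw [hmv]
    | cons p1 cur' =>
      obtain ⟨m, c⟩ := p1
      have hc1 : 1 ≤ c := hcc (m, c) (by simp)
      have h1 : m ≤ v := hvmax m (hperm.mem_iff.mp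
        (List.mem_append_left _ (mem_expand_of_mem _ (m, c) (by simp) hc1)))
      cases nxt with
      | nil =>
        have h2 : v ≤ m := by
          rcases List.mem_append.mp hvin with hv1 | hv2
          · exact expand_head_bound m c cur' hc1 hdc v hv1
          · rw [expandRL_nil] at hv2; simp at hv2
        have hmv : m = v := le_antisymm h1 h2
        unfold outB outM
        dsimp only
        rw [hmv]
      | cons p2 nxt' =>
        obtain ⟨m2, c2⟩ := p2
        have hc2 : 1 ≤ c2 := hcn (m2, c2) (by simp)
        have h2 : m2 ≤ v := hvmax m2 (hperm.mem_iff.mp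
          (List.mem_append_right _ (mem_expand_of_mem _ (m2, c2) (by simp) hc2)))
        unfold outB outM
        dsimp only
        by_cases hsel : m2 ≤ m
        · rw [if_pos hsel]
          have hmv : m = v := le_antisymm h1 (by
            rcases List.mem_append.mp hvin with hv1 | hv2
            · exact expand_head_bound m c cur' hc1 hdc v hv1
            · exact le_trans (expand_head_bound m2 c2 nxt' hc2 hdn v hv2) hsel)
          rw [hmv]
        · rw [if_neg hsel]
          have hmv : m2 = v := le_antisymm h2 (by
            rcases List.mem_append.mp hvin with hv1 | hv2
            · exact le_trans (expand_head_bound m c cur' hc1 hdc v hv1) (by omega)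
            · exact expand_head_bound m2 c2 nxt' hc2 hdn v hv2)
          rw [hmv]


theorem loopB_sim (H : Int) (cur nxt : List (Int × Nat)) (t : Int) :
    (0 < t → 1 ≤ H) → (∀ p ∈ cur, 1 ≤ p.2) → (∀ p ∈ nxt, 1 ≤ p.2) →
    (expandRL cur).Pairwise (fun a b => b ≤ a) →
    (expandRL nxt).Pairwise (fun a b => b ≤ a) →
    (∀ p ∈ cur ++ nxt, ∀ q ∈ nxt, PySem.Int.floordiv p.1 2 ≤ q.1) →
    ∀ ys, (expandRL cur ++ expandRL nxt).Perm ys → ys.Pairwise (fun a b => b ≤ a) →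
    outB H (loopB H cur nxt t) = outM H (loopM H ys t) := by
  intro h1 h2 h3 h4 h5 h6
  fun_induction loopB H cur nxt t with
  | case1 cur nxt t ht0 =>
    intro ys hperm hys
    rw [loopM_stop0 H ys t ht0]
    exact outB_stop H cur nxt t ys h2 h3 h4 h5 hperm hys
  | case2 t ht0 =>
    intro ys hperm hys
    have hy : ys = [] := (by simpa [expandRL_nil] using hperm : ([] : List Int).Perm ys).symm.eq_nil
    subst hy
    have hl : loopM H ([] : List Int) t = ([], t) := by simp [loopM]
    rw [hl]
    rfl
  | case3 t ht0 m cur' nxt ih =>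
    intro ys hperm hys
    exact absurd (h2 (m, 0) (by simp)) (by simp)
  | case4 t ht0 cur m2 nxt' hx ih =>
    intro ys hperm hys
    exact absurd (h3 (m2, 0) (by simp)) (by simp)
  | case5 t ht0 m c cur' hbrk =>
    intro ys hperm hys
    obtain ⟨vs, hysq⟩ := ys_head m _ ys
      (List.mem_append_left _ (mem_expand_of_mem _ (m, c + 1) (by simp) (by simp)))
      (by
        intro y hy
        rcases List.mem_append.mp hy with hy1 | hy2
        · exact expand_head_bound m (c + 1) cur' (by omega) h4 y hy1
        · rw [expandRL_nil] at hy2; simp at hy2)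
      hperm hys
    subst hysq
    have hstop : loopM H (m :: vs) t = (m :: vs, t) := by
      rw [loopM, if_neg ht0]
      rcases hbrk with hlt | h1m
      · rw [if_pos hlt]
      · by_cases hlt : m < H
        · rw [if_pos hlt]
        · rw [if_neg hlt, if_pos h1m]
    rw [hstop]
    exact outB_stop H _ _ t _ h2 h3 h4 h5 hperm hys
  | case6 t ht0 m c cur' hbrk hle ih =>
    intro ys hperm hys
    have hH : 1 ≤ H := h1 (by omega)
    obtain ⟨hnlt, hne1⟩ := not_or.mp hbrk
    have hm2 : 2 ≤ m := by omega
    obtain ⟨vs, hysq⟩ := ys_head m _ ys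
      (List.mem_append_left _ (mem_expand_of_mem _ (m, c + 1) (by simp) (by simp)))
      (by
        intro y hy
        rcases List.mem_append.mp hy with hy1 | hy2
        · exact expand_head_bound m (c + 1) cur' (by omega) h4 y hy1
        · rw [expandRL_nil] at hy2; simp at hy2)
      hperm hys
    subst hysq
    have hvmax := head_le_of_desc hys
    have hcA : ∀ p ∈ cur', 1 ≤ p.2 := fun p hp => h2 p (List.mem_cons_of_mem _ hp)
    have hball : ∀ p ∈ cur' ++ ([] : List (Int × Nat)), p.1 ≤ m := by
      intro p hp
      rcases List.mem_append.mp hp with hp1 | hp2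
      · exact hvmax p.1 (hperm.mem_iff.mp (List.mem_append_left _
          (mem_expand_of_mem _ p (List.mem_cons_of_mem _ hp1) (hcA p hp1))))
      · simp at hp2
    have hbB : ∀ p ∈ cur' ++ ([] : List (Int × Nat)), ∀ q ∈ ([] : List (Int × Nat)),
        PySem.Int.floordiv p.1 2 ≤ q.1 := by
      intro p _ q hq
      simp at hq
    have hfdq : ∀ q ∈ ([] : List (Int × Nat)), PySem.Int.floordiv m 2 ≤ q.1 := by
      intro q hq
      simp at hq
    have hdA : (expandRL cur').Pairwise (fun a b => b ≤ a) := by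
      rw [expandRL_cons] at h4
      exact (List.pairwise_append.mp h4).2.1
    have hdB : (expandRL ([] : List (Int × Nat))).Pairwise (fun a b => b ≤ a) := by simp [expandRL]
    obtain ⟨hcN, hdN, hbN⟩ := newnxt_inv m (c + 1) (by omega) hm2 cur' _ h3 hdB hball hbB hfdq
    simp only [List.nil_append] at hcN hdN hbN
    have hcount : c + 1 ≤ ((m :: vs).count m) := by
      rw [← hperm.count_eq m]
      simp only [expandRL_append, expandRL_cons, expandRL_nil, List.nil_append, List.append_nil, List.count_append, List.count_replicate, beq_iff_eq]
      first
      | omega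
      | (split_ifs <;> omega)
    obtain ⟨E, hE⟩ := repl_decomp m (c + 1) (m :: vs) hys hvmax hcount
    have hEdesc : E.Pairwise (fun a b => b ≤ a) := by
      have h9 := hE ▸ hys
      exact (List.pairwise_append.mp h9).2.1
    rw [hE, loopM_batch H m hm2 (by omega) c E t (by omega), if_pos hle]
    refine ih (fun _ => hH) hcA hcN hdA hdN hbN
      ((insD (PySem.Int.floordiv m 2))^[c + 1] E) ?_ (insD_iter_desc _ _ _ hEdesc)
    rw [List.perm_iff_count]
    intro a
    have h9 := hperm.count_eq a
    rw [hE] at h9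
    have h10 := (insD_iter_perm (PySem.Int.floordiv m 2) (c + 1) E).count_eq a
    simp only [expandRL_append, expandRL_cons, expandRL_nil, List.nil_append, List.append_nil, List.count_append, List.count_replicate, beq_iff_eq, show expandRL [(PySem.Int.floordiv m 2, c + 1)] = List.replicate (c + 1) (PySem.Int.floordiv m 2) from by simp [expandRL]] at h9 h10 ⊢
    first
    | omega
    | (split_ifs at h9 h10 ⊢ <;> omega)
  | case7 t ht0 m c cur' hbrk hnle =>
    intro ys hperm hys
    have hH : 1 ≤ H := h1 (by omega)
    obtain ⟨hnlt, hne1⟩ := not_or.mp hbrk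
    have hm2 : 2 ≤ m := by omega
    obtain ⟨vs, hysq⟩ := ys_head m _ ys
      (List.mem_append_left _ (mem_expand_of_mem _ (m, c + 1) (by simp) (by simp)))
      (by
        intro y hy
        rcases List.mem_append.mp hy with hy1 | hy2
        · exact expand_head_bound m (c + 1) cur' (by omega) h4 y hy1
        · rw [expandRL_nil] at hy2; simp at hy2)
      hperm hys
    subst hysq
    have hvmax := head_le_of_desc hys
    have hcA : ∀ p ∈ cur', 1 ≤ p.2 := fun p hp => h2 p (List.mem_cons_of_mem _ hp)
    have hball : ∀ p ∈ cur' ++ ([] : List (Int × Nat)), p.1 ≤ m := by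
      intro p hp
      rcases List.mem_append.mp hp with hp1 | hp2
      · exact hvmax p.1 (hperm.mem_iff.mp (List.mem_append_left _
          (mem_expand_of_mem _ p (List.mem_cons_of_mem _ hp1) (hcA p hp1))))
      · simp at hp2
    have hbB : ∀ p ∈ cur' ++ ([] : List (Int × Nat)), ∀ q ∈ ([] : List (Int × Nat)),
        PySem.Int.floordiv p.1 2 ≤ q.1 := by
      intro p _ q hq
      simp at hq
    have hfdq : ∀ q ∈ ([] : List (Int × Nat)), PySem.Int.floordiv m 2 ≤ q.1 := by
      intro q hq
      simp at hq
    have hdA : (expandRL cur').Pairwise (fun a b => b ≤ a) := by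
      rw [expandRL_cons] at h4
      exact (List.pairwise_append.mp h4).2.1
    have hdB : (expandRL ([] : List (Int × Nat))).Pairwise (fun a b => b ≤ a) := by simp [expandRL]
    obtain ⟨hcN, hdN, hbN⟩ := newnxt_inv m t.toNat (by omega) hm2 cur' _ h3 hdB hball hbB hfdq
    simp only [List.nil_append] at hcN hdN hbN
    have hcount : c + 1 ≤ ((m :: vs).count m) := by
      rw [← hperm.count_eq m]
      simp only [expandRL_append, expandRL_cons, expandRL_nil, List.nil_append, List.append_nil, List.count_append, List.count_replicate, beq_iff_eq]
      first
      | omega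
      | (split_ifs <;> omega)
    obtain ⟨E, hE⟩ := repl_decomp m (c + 1) (m :: vs) hys hvmax hcount
    have hEdesc : E.Pairwise (fun a b => b ≤ a) := by
      have h9 := hE ▸ hys
      exact (List.pairwise_append.mp h9).2.1
    rw [hE, loopM_batch H m hm2 (by omega) c E t (by omega), if_neg hnle]
    have hEle : ∀ b ∈ E, b ≤ m := by
      have h9 := (List.pairwise_append.mp (hE ▸ hys)).2.2
      intro b hb2
      exact h9 m (List.mem_replicate.mpr ⟨by omega, rfl⟩) b hb2
    have hinner : (List.replicate (c + 1 - t.toNat) m ++ E).Pairwise (fun a b => b ≤ a) := by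
      rw [List.pairwise_append]
      refine ⟨desc_replicate _ _, hEdesc, ?_⟩
      intro a ha b hb2
      rw [List.eq_of_mem_replicate ha]
      exact hEle b hb2
    apply outB_stop
    · intro p hp
      rcases List.mem_cons.mp hp with hp1 | hp2
      · rw [hp1]
        show 1 ≤ c + 1 - t.toNat
        omega
      · exact hcA p hp2
    · exact hcN
    · rw [expandRL_cons, List.pairwise_append]
      rw [expandRL_cons, List.pairwise_append] at h4
      obtain ⟨_, hA2, hcross⟩ := h4
      refine ⟨desc_replicate _ _, hA2, ?_⟩
      intro a ha b hb2
      rw [List.eq_of_mem_replicate ha]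
      exact hcross m (List.mem_replicate.mpr ⟨by omega, rfl⟩) b hb2
    · exact hdN
    · rw [List.perm_iff_count]
      intro a
      have h9 := hperm.count_eq a
      rw [hE] at h9
      have h10 := (insD_iter_perm (PySem.Int.floordiv m 2) t.toNat
        (List.replicate (c + 1 - t.toNat) m ++ E)).count_eq a
      simp only [expandRL_append, expandRL_cons, expandRL_nil, List.nil_append, List.append_nil, List.count_append, List.count_replicate, beq_iff_eq, show expandRL [(PySem.Int.floordiv m 2, t.toNat)] = List.replicate t.toNat (PySem.Int.floordiv m 2) from by simp [expandRL]] at h9 h10 ⊢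
      first
      | omega
      | (split_ifs at h9 h10 ⊢ <;> omega)
    · exact insD_iter_desc _ _ _ hinner
  | case8 t ht0 m2 c2 nxt' hbrk =>
    intro ys hperm hys
    obtain ⟨vs, hysq⟩ := ys_head m2 _ ys
      (List.mem_append_right _ (mem_expand_of_mem _ (m2, c2 + 1) (by simp) (by simp)))
      (by
        intro y hy
        rcases List.mem_append.mp hy with hy1 | hy2
        · rw [expandRL_nil] at hy1; simp at hy1
        · exact expand_head_bound m2 (c2 + 1) nxt' (by omega) h5 y hy2)
      hperm hys
    subst hysq
    have hstop : loopM H (m2 :: vs) t = (m2 :: vs, t) := by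
      rw [loopM, if_neg ht0]
      rcases hbrk with hlt | h1m
      · rw [if_pos hlt]
      · by_cases hlt : m2 < H
        · rw [if_pos hlt]
        · rw [if_neg hlt, if_pos h1m]
    rw [hstop]
    exact outB_stop H _ _ t _ h2 h3 h4 h5 hperm hys
  | case9 t ht0 m2 c2 nxt' hbrk hle ih =>
    intro ys hperm hys
    have hH : 1 ≤ H := h1 (by omega)
    obtain ⟨hnlt, hne1⟩ := not_or.mp hbrk
    have hm2 : 2 ≤ m2 := by omega
    obtain ⟨vs, hysq⟩ := ys_head m2 _ ys
      (List.mem_append_right _ (mem_expand_of_mem _ (m2, c2 + 1) (by simp) (by simp)))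
      (by
        intro y hy
        rcases List.mem_append.mp hy with hy1 | hy2
        · rw [expandRL_nil] at hy1; simp at hy1
        · exact expand_head_bound m2 (c2 + 1) nxt' (by omega) h5 y hy2)
      hperm hys
    subst hysq
    have hvmax := head_le_of_desc hys
    have hcB0 : ∀ p ∈ nxt', 1 ≤ p.2 := fun p hp => h3 p (List.mem_cons_of_mem _ hp)
    have hball : ∀ p ∈ ([] : List (Int × Nat)) ++ nxt', p.1 ≤ m2 := by
      intro p hp
      rcases List.mem_append.mp hp with hp1 | hp2
      · simp at hp1
      · exact hvmax p.1 (hperm.mem_iff.mp (List.mem_append_right _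
          (mem_expand_of_mem _ p (List.mem_cons_of_mem _ hp2) (hcB0 p hp2))))
    have hbB : ∀ p ∈ ([] : List (Int × Nat)) ++ nxt', ∀ q ∈ nxt',
        PySem.Int.floordiv p.1 2 ≤ q.1 := by
      intro p hp q hq
      rcases List.mem_append.mp hp with hp1 | hp2
      · simp at hp1
      · exact h6 p (List.mem_append_right _ (List.mem_cons_of_mem _ hp2)) q
          (List.mem_cons_of_mem _ hq)
    have hfdq : ∀ q ∈ nxt', PySem.Int.floordiv m2 2 ≤ q.1 := fun q hq =>
      h6 (m2, c2 + 1) (List.mem_append_right _ (by simp)) q (List.mem_cons_of_mem _ hq)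
    have hdA : (expandRL ([] : List (Int × Nat))).Pairwise (fun a b => b ≤ a) := by simp [expandRL]
    have hdB : (expandRL nxt').Pairwise (fun a b => b ≤ a) := by
      rw [expandRL_cons] at h5
      exact (List.pairwise_append.mp h5).2.1
    obtain ⟨hcN, hdN, hbN⟩ := newnxt_inv m2 (c2 + 1) (by omega) hm2 ([] : List (Int × Nat)) _ hcB0 hdB hball hbB hfdq
    have hcount : c2 + 1 ≤ ((m2 :: vs).count m2) := by
      rw [← hperm.count_eq m2]
      simp only [expandRL_append, expandRL_cons, expandRL_nil, List.nil_append, List.append_nil, List.count_append, List.count_replicate, beq_iff_eq]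
      first
      | omega
      | (split_ifs <;> omega)
    obtain ⟨E, hE⟩ := repl_decomp m2 (c2 + 1) (m2 :: vs) hys hvmax hcount
    have hEdesc : E.Pairwise (fun a b => b ≤ a) := by
      have h9 := hE ▸ hys
      exact (List.pairwise_append.mp h9).2.1
    rw [hE, loopM_batch H m2 hm2 (by omega) c2 E t (by omega), if_pos hle]
    refine ih (fun _ => hH) h2 hcN hdA hdN hbN
      ((insD (PySem.Int.floordiv m2 2))^[c2 + 1] E) ?_ (insD_iter_desc _ _ _ hEdesc)
    rw [List.perm_iff_count]
    intro a
    have h9 := hperm.count_eq a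
    rw [hE] at h9
    have h10 := (insD_iter_perm (PySem.Int.floordiv m2 2) (c2 + 1) E).count_eq a
    simp only [expandRL_append, expandRL_cons, expandRL_nil, List.nil_append, List.append_nil, List.count_append, List.count_replicate, beq_iff_eq, show expandRL [(PySem.Int.floordiv m2 2, c2 + 1)] = List.replicate (c2 + 1) (PySem.Int.floordiv m2 2) from by simp [expandRL]] at h9 h10 ⊢
    first
    | omega
    | (split_ifs at h9 h10 ⊢ <;> omega)
  | case10 t ht0 m2 c2 nxt' hbrk hnle =>
    intro ys hperm hys
    have hH : 1 ≤ H := h1 (by omega)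
    obtain ⟨hnlt, hne1⟩ := not_or.mp hbrk
    have hm2 : 2 ≤ m2 := by omega
    obtain ⟨vs, hysq⟩ := ys_head m2 _ ys
      (List.mem_append_right _ (mem_expand_of_mem _ (m2, c2 + 1) (by simp) (by simp)))
      (by
        intro y hy
        rcases List.mem_append.mp hy with hy1 | hy2
        · rw [expandRL_nil] at hy1; simp at hy1
        · exact expand_head_bound m2 (c2 + 1) nxt' (by omega) h5 y hy2)
      hperm hys
    subst hysq
    have hvmax := head_le_of_desc hys
    have hcB0 : ∀ p ∈ nxt', 1 ≤ p.2 := fun p hp => h3 p (List.mem_cons_of_mem _ hp)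
    have hball : ∀ p ∈ ([] : List (Int × Nat)) ++ nxt', p.1 ≤ m2 := by
      intro p hp
      rcases List.mem_append.mp hp with hp1 | hp2
      · simp at hp1
      · exact hvmax p.1 (hperm.mem_iff.mp (List.mem_append_right _
          (mem_expand_of_mem _ p (List.mem_cons_of_mem _ hp2) (hcB0 p hp2))))
    have hbB : ∀ p ∈ ([] : List (Int × Nat)) ++ nxt', ∀ q ∈ nxt',
        PySem.Int.floordiv p.1 2 ≤ q.1 := by
      intro p hp q hq
      rcases List.mem_append.mp hp with hp1 | hp2
      · simp at hp1
      · exact h6 p (List.mem_append_right _ (List.mem_cons_of_mem _ hp2)) q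
          (List.mem_cons_of_mem _ hq)
    have hfdq : ∀ q ∈ nxt', PySem.Int.floordiv m2 2 ≤ q.1 := fun q hq =>
      h6 (m2, c2 + 1) (List.mem_append_right _ (by simp)) q (List.mem_cons_of_mem _ hq)
    have hdA : (expandRL ([] : List (Int × Nat))).Pairwise (fun a b => b ≤ a) := by simp [expandRL]
    have hdB : (expandRL nxt').Pairwise (fun a b => b ≤ a) := by
      rw [expandRL_cons] at h5
      exact (List.pairwise_append.mp h5).2.1
    obtain ⟨hcN, hdN, hbN⟩ := newnxt_inv m2 t.toNat (by omega) hm2 ([] : List (Int × Nat)) _ hcB0 hdB hball hbB hfdq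
    have hcount : c2 + 1 ≤ ((m2 :: vs).count m2) := by
      rw [← hperm.count_eq m2]
      simp only [expandRL_append, expandRL_cons, expandRL_nil, List.nil_append, List.append_nil, List.count_append, List.count_replicate, beq_iff_eq]
      first
      | omega
      | (split_ifs <;> omega)
    obtain ⟨E, hE⟩ := repl_decomp m2 (c2 + 1) (m2 :: vs) hys hvmax hcount
    have hEdesc : E.Pairwise (fun a b => b ≤ a) := by
      have h9 := hE ▸ hys
      exact (List.pairwise_append.mp h9).2.1
    rw [hE, loopM_batch H m2 hm2 (by omega) c2 E t (by omega), if_neg hnle]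
    have hEle : ∀ b ∈ E, b ≤ m2 := by
      have h9 := (List.pairwise_append.mp (hE ▸ hys)).2.2
      intro b hb2
      exact h9 m2 (List.mem_replicate.mpr ⟨by omega, rfl⟩) b hb2
    have hinner : (List.replicate (c2 + 1 - t.toNat) m2 ++ E).Pairwise (fun a b => b ≤ a) := by
      rw [List.pairwise_append]
      refine ⟨desc_replicate _ _, hEdesc, ?_⟩
      intro a ha b hb2
      rw [List.eq_of_mem_replicate ha]
      exact hEle b hb2
    apply outB_stop
    · exact h2
    · intro p hp
      rcases List.mem_cons.mp hp with hp1 | hp2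
      · rw [hp1]
        show 1 ≤ c2 + 1 - t.toNat
        omega
      · exact hcN p hp2
    · exact hdA
    · rw [expandRL_cons, List.pairwise_append]
      refine ⟨desc_replicate _ _, hdN, ?_⟩
      intro a ha b hb2
      rw [List.eq_of_mem_replicate ha]
      rcases mem_of_mem_expand _ _ hb2 with ⟨q, hq, rfl⟩
      rcases List.mem_append.mp hq with hq1 | hq2
      · exact hball q (List.mem_append_right _ hq1)
      · rw [List.mem_singleton] at hq2
        subst hq2
        exact fd2_le_self _ (by omega)
    · rw [List.perm_iff_count]
      intro a
      have h9 := hperm.count_eq a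
      rw [hE] at h9
      have h10 := (insD_iter_perm (PySem.Int.floordiv m2 2) t.toNat
        (List.replicate (c2 + 1 - t.toNat) m2 ++ E)).count_eq a
      simp only [expandRL_append, expandRL_cons, expandRL_nil, List.nil_append, List.append_nil, List.count_append, List.count_replicate, beq_iff_eq, show expandRL [(PySem.Int.floordiv m2 2, t.toNat)] = List.replicate t.toNat (PySem.Int.floordiv m2 2) from by simp [expandRL]] at h9 h10 ⊢
      first
      | omega
      | (split_ifs at h9 h10 ⊢ <;> omega)
    · exact insD_iter_desc _ _ _ hinner
  | case11 t ht0 m c cur' m2 c2 nxt' hsel hbrk =>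
    intro ys hperm hys
    obtain ⟨vs, hysq⟩ := ys_head m _ ys
      (List.mem_append_left _ (mem_expand_of_mem _ (m, c + 1) (by simp) (by simp)))
      (by
        intro y hy
        rcases List.mem_append.mp hy with hy1 | hy2
        · exact expand_head_bound m (c + 1) cur' (by omega) h4 y hy1
        · exact le_trans (expand_head_bound m2 (c2 + 1) nxt' (by omega) h5 y hy2) hsel)
      hperm hys
    subst hysq
    have hstop : loopM H (m :: vs) t = (m :: vs, t) := by
      rw [loopM, if_neg ht0]
      rcases hbrk with hlt | h1m
      · rw [if_pos hlt]
      · by_cases hlt : m < H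
        · rw [if_pos hlt]
        · rw [if_neg hlt, if_pos h1m]
    rw [hstop]
    exact outB_stop H _ _ t _ h2 h3 h4 h5 hperm hys
  | case12 t ht0 m c cur' m2 c2 nxt' hsel hbrk hle ih =>
    intro ys hperm hys
    have hH : 1 ≤ H := h1 (by omega)
    obtain ⟨hnlt, hne1⟩ := not_or.mp hbrk
    have hm2 : 2 ≤ m := by omega
    obtain ⟨vs, hysq⟩ := ys_head m _ ys
      (List.mem_append_left _ (mem_expand_of_mem _ (m, c + 1) (by simp) (by simp)))
      (by
        intro y hy
        rcases List.mem_append.mp hy with hy1 | hy2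
        · exact expand_head_bound m (c + 1) cur' (by omega) h4 y hy1
        · exact le_trans (expand_head_bound m2 (c2 + 1) nxt' (by omega) h5 y hy2) hsel)
      hperm hys
    subst hysq
    have hvmax := head_le_of_desc hys
    have hcA : ∀ p ∈ cur', 1 ≤ p.2 := fun p hp => h2 p (List.mem_cons_of_mem _ hp)
    have hball : ∀ p ∈ cur' ++ (m2, c2 + 1) :: nxt', p.1 ≤ m := by
      intro p hp
      rcases List.mem_append.mp hp with hp1 | hp2
      · exact hvmax p.1 (hperm.mem_iff.mp (List.mem_append_left _
          (mem_expand_of_mem _ p (List.mem_cons_of_mem _ hp1) (hcA p hp1))))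
      · exact hvmax p.1 (hperm.mem_iff.mp (List.mem_append_right _
          (mem_expand_of_mem _ p hp2 (h3 p hp2))))
    have hbB : ∀ p ∈ cur' ++ (m2, c2 + 1) :: nxt', ∀ q ∈ (m2, c2 + 1) :: nxt',
        PySem.Int.floordiv p.1 2 ≤ q.1 := by
      intro p hp q hq
      rcases List.mem_append.mp hp with hp1 | hp2
      · exact h6 p (List.mem_append_left _ (List.mem_cons_of_mem _ hp1)) q hq
      · exact h6 p (List.mem_append_right _ hp2) q hq
    have hfdq : ∀ q ∈ (m2, c2 + 1) :: nxt', PySem.Int.floordiv m 2 ≤ q.1 := fun q hq =>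
      h6 (m, c + 1) (List.mem_append_left _ (by simp)) q hq
    have hdA : (expandRL cur').Pairwise (fun a b => b ≤ a) := by
      rw [expandRL_cons] at h4
      exact (List.pairwise_append.mp h4).2.1
    have hdB := h5
    obtain ⟨hcN, hdN, hbN⟩ := newnxt_inv m (c + 1) (by omega) hm2 cur' _ h3 hdB hball hbB hfdq
    have hcount : c + 1 ≤ ((m :: vs).count m) := by
      rw [← hperm.count_eq m]
      simp only [expandRL_append, expandRL_cons, expandRL_nil, List.nil_append, List.append_nil, List.count_append, List.count_replicate, beq_iff_eq]
      first
      | omega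
      | (split_ifs <;> omega)
    obtain ⟨E, hE⟩ := repl_decomp m (c + 1) (m :: vs) hys hvmax hcount
    have hEdesc : E.Pairwise (fun a b => b ≤ a) := by
      have h9 := hE ▸ hys
      exact (List.pairwise_append.mp h9).2.1
    rw [hE, loopM_batch H m hm2 (by omega) c E t (by omega), if_pos hle]
    refine ih (fun _ => hH) hcA hcN hdA hdN hbN
      ((insD (PySem.Int.floordiv m 2))^[c + 1] E) ?_ (insD_iter_desc _ _ _ hEdesc)
    rw [List.perm_iff_count]
    intro a
    have h9 := hperm.count_eq a
    rw [hE] at h9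
    have h10 := (insD_iter_perm (PySem.Int.floordiv m 2) (c + 1) E).count_eq a
    simp only [expandRL_append, expandRL_cons, expandRL_nil, List.nil_append, List.append_nil, List.count_append, List.count_replicate, beq_iff_eq, show expandRL [(PySem.Int.floordiv m 2, c + 1)] = List.replicate (c + 1) (PySem.Int.floordiv m 2) from by simp [expandRL]] at h9 h10 ⊢
    first
    | omega
    | (split_ifs at h9 h10 ⊢ <;> omega)
  | case13 t ht0 m c cur' m2 c2 nxt' hsel hbrk hnle =>
    intro ys hperm hys
    have hH : 1 ≤ H := h1 (by omega)
    obtain ⟨hnlt, hne1⟩ := not_or.mp hbrk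
    have hm2 : 2 ≤ m := by omega
    obtain ⟨vs, hysq⟩ := ys_head m _ ys
      (List.mem_append_left _ (mem_expand_of_mem _ (m, c + 1) (by simp) (by simp)))
      (by
        intro y hy
        rcases List.mem_append.mp hy with hy1 | hy2
        · exact expand_head_bound m (c + 1) cur' (by omega) h4 y hy1
        · exact le_trans (expand_head_bound m2 (c2 + 1) nxt' (by omega) h5 y hy2) hsel)
      hperm hys
    subst hysq
    have hvmax := head_le_of_desc hys
    have hcA : ∀ p ∈ cur', 1 ≤ p.2 := fun p hp => h2 p (List.mem_cons_of_mem _ hp)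
    have hball : ∀ p ∈ cur' ++ (m2, c2 + 1) :: nxt', p.1 ≤ m := by
      intro p hp
      rcases List.mem_append.mp hp with hp1 | hp2
      · exact hvmax p.1 (hperm.mem_iff.mp (List.mem_append_left _
          (mem_expand_of_mem _ p (List.mem_cons_of_mem _ hp1) (hcA p hp1))))
      · exact hvmax p.1 (hperm.mem_iff.mp (List.mem_append_right _
          (mem_expand_of_mem _ p hp2 (h3 p hp2))))
    have hbB : ∀ p ∈ cur' ++ (m2, c2 + 1) :: nxt', ∀ q ∈ (m2, c2 + 1) :: nxt',
        PySem.Int.floordiv p.1 2 ≤ q.1 := by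
      intro p hp q hq
      rcases List.mem_append.mp hp with hp1 | hp2
      · exact h6 p (List.mem_append_left _ (List.mem_cons_of_mem _ hp1)) q hq
      · exact h6 p (List.mem_append_right _ hp2) q hq
    have hfdq : ∀ q ∈ (m2, c2 + 1) :: nxt', PySem.Int.floordiv m 2 ≤ q.1 := fun q hq =>
      h6 (m, c + 1) (List.mem_append_left _ (by simp)) q hq
    have hdA : (expandRL cur').Pairwise (fun a b => b ≤ a) := by
      rw [expandRL_cons] at h4
      exact (List.pairwise_append.mp h4).2.1
    have hdB := h5
    obtain ⟨hcN, hdN, hbN⟩ := newnxt_inv m t.toNat (by omega) hm2 cur' _ h3 hdB hball hbB hfdq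
    have hcount : c + 1 ≤ ((m :: vs).count m) := by
      rw [← hperm.count_eq m]
      simp only [expandRL_append, expandRL_cons, expandRL_nil, List.nil_append, List.append_nil, List.count_append, List.count_replicate, beq_iff_eq]
      first
      | omega
      | (split_ifs <;> omega)
    obtain ⟨E, hE⟩ := repl_decomp m (c + 1) (m :: vs) hys hvmax hcount
    have hEdesc : E.Pairwise (fun a b => b ≤ a) := by
      have h9 := hE ▸ hys
      exact (List.pairwise_append.mp h9).2.1
    rw [hE, loopM_batch H m hm2 (by omega) c E t (by omega), if_neg hnle]
    have hEle : ∀ b ∈ E, b ≤ m := by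
      have h9 := (List.pairwise_append.mp (hE ▸ hys)).2.2
      intro b hb2
      exact h9 m (List.mem_replicate.mpr ⟨by omega, rfl⟩) b hb2
    have hinner : (List.replicate (c + 1 - t.toNat) m ++ E).Pairwise (fun a b => b ≤ a) := by
      rw [List.pairwise_append]
      refine ⟨desc_replicate _ _, hEdesc, ?_⟩
      intro a ha b hb2
      rw [List.eq_of_mem_replicate ha]
      exact hEle b hb2
    apply outB_stop
    · intro p hp
      rcases List.mem_cons.mp hp with hp1 | hp2
      · rw [hp1]
        show 1 ≤ c + 1 - t.toNat
        omega
      · exact hcA p hp2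
    · exact hcN
    · rw [expandRL_cons, List.pairwise_append]
      rw [expandRL_cons, List.pairwise_append] at h4
      obtain ⟨_, hA2, hcross⟩ := h4
      refine ⟨desc_replicate _ _, hA2, ?_⟩
      intro a ha b hb2
      rw [List.eq_of_mem_replicate ha]
      exact hcross m (List.mem_replicate.mpr ⟨by omega, rfl⟩) b hb2
    · exact hdN
    · rw [List.perm_iff_count]
      intro a
      have h9 := hperm.count_eq a
      rw [hE] at h9
      have h10 := (insD_iter_perm (PySem.Int.floordiv m 2) t.toNat
        (List.replicate (c + 1 - t.toNat) m ++ E)).count_eq a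
      simp only [expandRL_append, expandRL_cons, expandRL_nil, List.nil_append, List.append_nil, List.count_append, List.count_replicate, beq_iff_eq, show expandRL [(PySem.Int.floordiv m 2, t.toNat)] = List.replicate t.toNat (PySem.Int.floordiv m 2) from by simp [expandRL]] at h9 h10 ⊢
      first
      | omega
      | (split_ifs at h9 h10 ⊢ <;> omega)
    · exact insD_iter_desc _ _ _ hinner
  | case14 t ht0 m c cur' m2 c2 nxt' hnsel hbrk =>
    intro ys hperm hys
    obtain ⟨vs, hysq⟩ := ys_head m2 _ ys
      (List.mem_append_right _ (mem_expand_of_mem _ (m2, c2 + 1) (by simp) (by simp)))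
      (by
        intro y hy
        rcases List.mem_append.mp hy with hy1 | hy2
        · exact le_trans (expand_head_bound m (c + 1) cur' (by omega) h4 y hy1) (by omega)
        · exact expand_head_bound m2 (c2 + 1) nxt' (by omega) h5 y hy2)
      hperm hys
    subst hysq
    have hstop : loopM H (m2 :: vs) t = (m2 :: vs, t) := by
      rw [loopM, if_neg ht0]
      rcases hbrk with hlt | h1m
      · rw [if_pos hlt]
      · by_cases hlt : m2 < H
        · rw [if_pos hlt]
        · rw [if_neg hlt, if_pos h1m]
    rw [hstop]
    exact outB_stop H _ _ t _ h2 h3 h4 h5 hperm hys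
  | case15 t ht0 m c cur' m2 c2 nxt' hnsel hbrk hle ih =>
    intro ys hperm hys
    have hH : 1 ≤ H := h1 (by omega)
    obtain ⟨hnlt, hne1⟩ := not_or.mp hbrk
    have hm2 : 2 ≤ m2 := by omega
    obtain ⟨vs, hysq⟩ := ys_head m2 _ ys
      (List.mem_append_right _ (mem_expand_of_mem _ (m2, c2 + 1) (by simp) (by simp)))
      (by
        intro y hy
        rcases List.mem_append.mp hy with hy1 | hy2
        · exact le_trans (expand_head_bound m (c + 1) cur' (by omega) h4 y hy1) (by omega)
        · exact expand_head_bound m2 (c2 + 1) nxt' (by omega) h5 y hy2)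
      hperm hys
    subst hysq
    have hvmax := head_le_of_desc hys
    have hcB0 : ∀ p ∈ nxt', 1 ≤ p.2 := fun p hp => h3 p (List.mem_cons_of_mem _ hp)
    have hball : ∀ p ∈ ((m, c + 1) :: cur') ++ nxt', p.1 ≤ m2 := by
      intro p hp
      rcases List.mem_append.mp hp with hp1 | hp2
      · exact hvmax p.1 (hperm.mem_iff.mp (List.mem_append_left _
          (mem_expand_of_mem _ p hp1 (h2 p hp1))))
      · exact hvmax p.1 (hperm.mem_iff.mp (List.mem_append_right _
          (mem_expand_of_mem _ p (List.mem_cons_of_mem _ hp2) (hcB0 p hp2))))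
    have hbB : ∀ p ∈ ((m, c + 1) :: cur') ++ nxt', ∀ q ∈ nxt',
        PySem.Int.floordiv p.1 2 ≤ q.1 := by
      intro p hp q hq
      rcases List.mem_append.mp hp with hp1 | hp2
      · exact h6 p (List.mem_append_left _ hp1) q (List.mem_cons_of_mem _ hq)
      · exact h6 p (List.mem_append_right _ (List.mem_cons_of_mem _ hp2)) q
          (List.mem_cons_of_mem _ hq)
    have hfdq : ∀ q ∈ nxt', PySem.Int.floordiv m2 2 ≤ q.1 := fun q hq =>
      h6 (m2, c2 + 1) (List.mem_append_right _ (by simp)) q (List.mem_cons_of_mem _ hq)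
    have hdA := h4
    have hdB : (expandRL nxt').Pairwise (fun a b => b ≤ a) := by
      rw [expandRL_cons] at h5
      exact (List.pairwise_append.mp h5).2.1
    obtain ⟨hcN, hdN, hbN⟩ := newnxt_inv m2 (c2 + 1) (by omega) hm2 ((m, c + 1) :: cur') _ hcB0 hdB hball hbB hfdq
    have hcount : c2 + 1 ≤ ((m2 :: vs).count m2) := by
      rw [← hperm.count_eq m2]
      simp only [expandRL_append, expandRL_cons, expandRL_nil, List.nil_append, List.append_nil, List.count_append, List.count_replicate, beq_iff_eq]
      first
      | omega
      | (split_ifs <;> omega)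
    obtain ⟨E, hE⟩ := repl_decomp m2 (c2 + 1) (m2 :: vs) hys hvmax hcount
    have hEdesc : E.Pairwise (fun a b => b ≤ a) := by
      have h9 := hE ▸ hys
      exact (List.pairwise_append.mp h9).2.1
    rw [hE, loopM_batch H m2 hm2 (by omega) c2 E t (by omega), if_pos hle]
    refine ih (fun _ => hH) h2 hcN hdA hdN hbN
      ((insD (PySem.Int.floordiv m2 2))^[c2 + 1] E) ?_ (insD_iter_desc _ _ _ hEdesc)
    rw [List.perm_iff_count]
    intro a
    have h9 := hperm.count_eq a
    rw [hE] at h9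
    have h10 := (insD_iter_perm (PySem.Int.floordiv m2 2) (c2 + 1) E).count_eq a
    simp only [expandRL_append, expandRL_cons, expandRL_nil, List.nil_append, List.append_nil, List.count_append, List.count_replicate, beq_iff_eq, show expandRL [(PySem.Int.floordiv m2 2, c2 + 1)] = List.replicate (c2 + 1) (PySem.Int.floordiv m2 2) from by simp [expandRL]] at h9 h10 ⊢
    first
    | omega
    | (split_ifs at h9 h10 ⊢ <;> omega)
  | case16 t ht0 m c cur' m2 c2 nxt' hnsel hbrk hnle =>
    intro ys hperm hys
    have hH : 1 ≤ H := h1 (by omega)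
    obtain ⟨hnlt, hne1⟩ := not_or.mp hbrk
    have hm2 : 2 ≤ m2 := by omega
    obtain ⟨vs, hysq⟩ := ys_head m2 _ ys
      (List.mem_append_right _ (mem_expand_of_mem _ (m2, c2 + 1) (by simp) (by simp)))
      (by
        intro y hy
        rcases List.mem_append.mp hy with hy1 | hy2
        · exact le_trans (expand_head_bound m (c + 1) cur' (by omega) h4 y hy1) (by omega)
        · exact expand_head_bound m2 (c2 + 1) nxt' (by omega) h5 y hy2)
      hperm hys
    subst hysq
    have hvmax := head_le_of_desc hys
    have hcB0 : ∀ p ∈ nxt', 1 ≤ p.2 := fun p hp => h3 p (List.mem_cons_of_mem _ hp)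
    have hball : ∀ p ∈ ((m, c + 1) :: cur') ++ nxt', p.1 ≤ m2 := by
      intro p hp
      rcases List.mem_append.mp hp with hp1 | hp2
      · exact hvmax p.1 (hperm.mem_iff.mp (List.mem_append_left _
          (mem_expand_of_mem _ p hp1 (h2 p hp1))))
      · exact hvmax p.1 (hperm.mem_iff.mp (List.mem_append_right _
          (mem_expand_of_mem _ p (List.mem_cons_of_mem _ hp2) (hcB0 p hp2))))
    have hbB : ∀ p ∈ ((m, c + 1) :: cur') ++ nxt', ∀ q ∈ nxt',
        PySem.Int.floordiv p.1 2 ≤ q.1 := by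
      intro p hp q hq
      rcases List.mem_append.mp hp with hp1 | hp2
      · exact h6 p (List.mem_append_left _ hp1) q (List.mem_cons_of_mem _ hq)
      · exact h6 p (List.mem_append_right _ (List.mem_cons_of_mem _ hp2)) q
          (List.mem_cons_of_mem _ hq)
    have hfdq : ∀ q ∈ nxt', PySem.Int.floordiv m2 2 ≤ q.1 := fun q hq =>
      h6 (m2, c2 + 1) (List.mem_append_right _ (by simp)) q (List.mem_cons_of_mem _ hq)
    have hdA := h4
    have hdB : (expandRL nxt').Pairwise (fun a b => b ≤ a) := by
      rw [expandRL_cons] at h5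
      exact (List.pairwise_append.mp h5).2.1
    obtain ⟨hcN, hdN, hbN⟩ := newnxt_inv m2 t.toNat (by omega) hm2 ((m, c + 1) :: cur') _ hcB0 hdB hball hbB hfdq
    have hcount : c2 + 1 ≤ ((m2 :: vs).count m2) := by
      rw [← hperm.count_eq m2]
      simp only [expandRL_append, expandRL_cons, expandRL_nil, List.nil_append, List.append_nil, List.count_append, List.count_replicate, beq_iff_eq]
      first
      | omega
      | (split_ifs <;> omega)
    obtain ⟨E, hE⟩ := repl_decomp m2 (c2 + 1) (m2 :: vs) hys hvmax hcount
    have hEdesc : E.Pairwise (fun a b => b ≤ a) := by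
      have h9 := hE ▸ hys
      exact (List.pairwise_append.mp h9).2.1
    rw [hE, loopM_batch H m2 hm2 (by omega) c2 E t (by omega), if_neg hnle]
    have hEle : ∀ b ∈ E, b ≤ m2 := by
      have h9 := (List.pairwise_append.mp (hE ▸ hys)).2.2
      intro b hb2
      exact h9 m2 (List.mem_replicate.mpr ⟨by omega, rfl⟩) b hb2
    have hinner : (List.replicate (c2 + 1 - t.toNat) m2 ++ E).Pairwise (fun a b => b ≤ a) := by
      rw [List.pairwise_append]
      refine ⟨desc_replicate _ _, hEdesc, ?_⟩
      intro a ha b hb2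
      rw [List.eq_of_mem_replicate ha]
      exact hEle b hb2
    apply outB_stop
    · exact h2
    · intro p hp
      rcases List.mem_cons.mp hp with hp1 | hp2
      · rw [hp1]
        show 1 ≤ c2 + 1 - t.toNat
        omega
      · exact hcN p hp2
    · exact hdA
    · rw [expandRL_cons, List.pairwise_append]
      refine ⟨desc_replicate _ _, hdN, ?_⟩
      intro a ha b hb2
      rw [List.eq_of_mem_replicate ha]
      rcases mem_of_mem_expand _ _ hb2 with ⟨q, hq, rfl⟩
      rcases List.mem_append.mp hq with hq1 | hq2
      · exact hball q (List.mem_append_right _ hq1)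
      · rw [List.mem_singleton] at hq2
        subst hq2
        exact fd2_le_self _ (by omega)
    · rw [List.perm_iff_count]
      intro a
      have h9 := hperm.count_eq a
      rw [hE] at h9
      have h10 := (insD_iter_perm (PySem.Int.floordiv m2 2) t.toNat
        (List.replicate (c2 + 1 - t.toNat) m2 ++ E)).count_eq a
      simp only [expandRL_append, expandRL_cons, expandRL_nil, List.nil_append, List.append_nil, List.count_append, List.count_replicate, beq_iff_eq, show expandRL [(PySem.Int.floordiv m2 2, t.toNat)] = List.replicate t.toNat (PySem.Int.floordiv m2 2) from by simp [expandRL]] at h9 h10 ⊢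
      first
      | omega
      | (split_ifs at h9 h10 ⊢ <;> omega)
    · exact insD_iter_desc _ _ _ hinner

theorem out_stop (H : Int) (pq : List (Int × Int)) (v : Int) (vs : List Int) (t : Int)
    (hperm : (pq.map (fun p => -p.1)).Perm (v :: vs))
    (hdesc : (v :: vs).Pairwise (fun a b => b ≤ a)) :
    outA H (pq, t) = outM H (v :: vs, t) := by
  unfold outA outM
  rw [max?_of_bounds _ v (hperm.mem_iff.mpr (by simp)) ?_]
  · rfl
  · intro y hy
    rcases List.mem_cons.mp (hperm.mem_iff.mp hy) with rfl | hy2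
    · exact le_refl y
    · exact (List.pairwise_cons.mp hdesc).1 y hy2

theorem out_true (H : Int) (l : List (Int × Int)) (t : Int) (hne : l ≠ [])
    (hall : ∀ q ∈ l, -q.1 < H) : outA H (l, t) = some (true, t) := by
  unfold outA
  cases hmax : PySem.List.max? (l.map (fun p => -p.1)) (fun v => v) with
  | none =>
    rw [PySem.List.max?_eq_none_iff] at hmax
    simp at hmax
    exact absurd hmax hne
  | some mx =>
    obtain ⟨q, hq, rfl⟩ := List.mem_map.mp (PySem.List.max?_mem hmax)
    simp [hall q hq]

theorem loopA_ones (n : Nat) : ∀ (pq : List (Int × Int)) (left : PySem.Set Int) (t : Int),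
    pq.countP (fun p => p.1 = -1) = n → 0 < t → pq ≠ [] →
    (∀ q ∈ pq, q.1 = -1 ∨ q.1 = 1) →
    outA 1 (loopA 1 pq left t) = some (false, 1) := by
  induction n using Nat.strong_induction_on with
  | _ n ih =>
    intro pq left t hcount ht hne hkeys
    cases pq with
    | nil => exact absurd rfl hne
    | cons x xs =>
      rw [loopA, dif_neg (by omega : ¬ t ≤ 0)]
      have hpmem : pvHeapMin x xs ∈ x :: xs := pvHeapMin_mem x xs
      rcases hkeys _ hpmem with hk1 | hk2
      · rw [if_neg (by omega : ¬ -(pvHeapMin x xs).1 < 1)]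
        rw [dif_pos (by omega : -(pvHeapMin x xs).1 = 1)]
        refine ih _ (hcount ▸ pvCountFlag x xs _ hpmem hk1) _ left t rfl ht (by simp) ?_
        intro q hq
        rcases List.mem_append.mp hq with hq2 | hq2
        · exact hkeys q (List.mem_of_mem_erase hq2)
        · simp at hq2; subst hq2; simp
      · have hall : ∀ q ∈ x :: xs, q.1 = 1 := by
          intro q hq
          have hle := pvHeapMin_le x xs q hq
          rcases hkeys q hq with h | h
          · omega
          · exact h
        rw [if_pos (by omega : -(pvHeapMin x xs).1 < 1)]
        unfold outA
        rw [max?_of_bounds _ 1 ?_ ?_]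
        · norm_num
        · rw [List.map_append]
          refine List.mem_append_right _ ?_
          simp [hk2]
        · intro y hy
          rw [List.map_append] at hy
          rcases List.mem_append.mp hy with hy2 | hy2
          · obtain ⟨q, hq, rfl⟩ := List.mem_map.mp hy2
            have := hall q (List.mem_of_mem_erase hq)
            omega
          · simp at hy2; omega


theorem loopA_sim (H : Int) (n : Nat) :
    ∀ (t : Int), t.toNat ≤ n → ∀ (pq : List (Int × Int)) (left : PySem.Set Int) (ys : List Int),
    ys ≠ [] → ys.Pairwise (fun a b => b ≤ a) → (0 < t → 1 ≤ H) →
    (0 < t → H = 1 → ∀ v ∈ ys, 1 ≤ v) →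
    (0 < t → ∃ y ∈ ys, -H < y) →
    (pq.map (fun p => -p.1)).Perm ys → (pq.map Prod.snd).Nodup →
    (∀ i, i ∈ left ↔ ∃ q ∈ pq, q.2 = i ∧ H ≤ -q.1) →
    outA H (loopA H pq left t) = outM H (loopM H ys t) := by
  induction n with
  | zero =>
    intro t htn pq left ys hne hdesc hHt hpos hwit hperm hnodup hleft
    cases ys with
    | nil => exact absurd rfl hne
    | cons v vs =>
    have hpqne : pq ≠ [] := by intro h; subst h; simp at hperm
    cases pq with
    | nil => exact absurd rfl hpqne
    | cons x xs =>
    have ht0 : t ≤ 0 := by omega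
    rw [loopA, dif_pos ht0, loopM, if_pos ht0]
    exact out_stop H _ v vs t hperm hdesc
  | succ n ih =>
    intro t htn pq left ys hne hdesc hHt hpos hwit hperm hnodup hleft
    cases ys with
    | nil => exact absurd rfl hne
    | cons v vs =>
    have hpqne : pq ≠ [] := by intro h; subst h; simp at hperm
    cases pq with
    | nil => exact absurd rfl hpqne
    | cons x xs =>
    by_cases ht0 : t ≤ 0
    · rw [loopA, dif_pos ht0, loopM, if_pos ht0]
      exact out_stop H _ v vs t hperm hdesc
    · have hH : 1 ≤ H := hHt (by omega)
      have hpmem : pvHeapMin x xs ∈ x :: xs := pvHeapMin_mem x xs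
      have hvmax : ∀ y ∈ v :: vs, y ≤ v := by
        intro y hy
        rcases List.mem_cons.mp hy with rfl | hy2
        · exact le_refl y
        · exact (List.pairwise_cons.mp hdesc).1 y hy2
      have hval : -(pvHeapMin x xs).1 = v := by
        have h1 : -(pvHeapMin x xs).1 ∈ (x :: xs).map (fun p => -p.1) :=
          List.mem_map.mpr ⟨_, hpmem, rfl⟩
        have h2 := hvmax _ (hperm.mem_iff.mp h1)
        have h3 : v ∈ (x :: xs).map (fun p => -p.1) := hperm.mem_iff.mpr (by simp)
        obtain ⟨q, hq, hqv⟩ := List.mem_map.mp h3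
        have h4 := pvHeapMin_le x xs q hq
        omega
      have hpe : (x :: xs).Perm (pvHeapMin x xs :: (x :: xs).erase (pvHeapMin x xs)) :=
        List.perm_cons_erase hpmem
      have hrestperm : (((x :: xs).erase (pvHeapMin x xs)).map (fun p => -p.1)).Perm vs := by
        have h5 : ((-(pvHeapMin x xs).1) ::
            ((x :: xs).erase (pvHeapMin x xs)).map (fun p => -p.1)).Perm (v :: vs) :=
          (by simpa using hpe.map (fun p => -p.1) : ((x :: xs).map (fun p => -p.1)).Perm _).symm.trans hperm
        rw [hval] at h5
        exact h5.cons_inv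
      have hsndfresh : ∀ q ∈ (x :: xs).erase (pvHeapMin x xs), q.2 ≠ (pvHeapMin x xs).2 := by
        have h6 : ((pvHeapMin x xs :: (x :: xs).erase (pvHeapMin x xs)).map Prod.snd).Nodup :=
          ((hpe.map Prod.snd).nodup_iff).mp hnodup
        rw [List.map_cons, List.nodup_cons] at h6
        intro q hq hqe
        exact h6.1 (hqe ▸ List.mem_map.mpr ⟨q, hq, rfl⟩)
      have hvgt : -H < v := by
        obtain ⟨y, hy, hgty⟩ := hwit (by omega)
        exact lt_of_lt_of_le hgty (hvmax y hy)
      have htn' : (t - 1).toNat ≤ n := by omega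
      rw [loopA, dif_neg ht0]
      dsimp only
      rw [hval]
      by_cases hvH : v < H
      · rw [if_pos hvH, loopM, if_neg ht0, if_pos hvH]
        rw [out_true H _ t (by simp) ?_]
        · simp [outM, hvH]
        · intro q hq
          rcases List.mem_append.mp hq with hq2 | hq2
          · have hq4 := List.mem_of_mem_erase hq2
            have hy : -q.1 ∈ (x :: xs).map (fun p => -p.1) := List.mem_map.mpr ⟨q, hq4, rfl⟩
            have := hvmax _ (hperm.mem_iff.mp hy)
            omega
          · simp at hq2
            rw [hq2]
            simp
            omega
      · rw [if_neg hvH]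
        by_cases hv1 : v = 1
        · have hH1 : H = 1 := by omega
          subst hH1
          have hposall := hpos (by omega) rfl
          rw [dif_pos hv1]
          rw [loopM, if_neg ht0, if_neg (show ¬ v < 1 by omega), if_pos hv1]
          rw [loopA_ones (((x :: xs).erase (pvHeapMin x xs) ++
              [((1 : Int), (pvHeapMin x xs).2)]).countP (fun p => p.1 = -1)) _ left t rfl
              (by omega) (by simp) ?_]
          · simp [outM, hv1]
          · intro q hq
            rcases List.mem_append.mp hq with hq2 | hq2
            · left
              have hq4 := List.mem_of_mem_erase hq2
              have hy : -q.1 ∈ (x :: xs).map (fun p => -p.1) := List.mem_map.mpr ⟨q, hq4, rfl⟩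
              have h5 := hperm.mem_iff.mp hy
              have h6 := hvmax _ h5
              have h7 : 1 ≤ -q.1 := hposall _ h5
              omega
            · right
              simp at hq2
              rw [hq2]
        · rw [dif_neg hv1]
          have hv2 : 2 ≤ v := by omega
          have hHv : H ≤ v := by omega
          have hfdeq : PySem.Int.floordiv v 2 = v / 2 :=
            PySem.Int.floordiv_eq_ediv_of_pos (by omega)
          have hfdb : 1 ≤ PySem.Int.floordiv v 2 ∧ PySem.Int.floordiv v 2 < v := by
            rw [hfdeq]
            omega
          rw [loopM, if_neg ht0, if_neg hvH, if_neg hv1]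
          have hpermnew : ((((x :: xs).erase (pvHeapMin x xs) ++
              [(-(PySem.Int.floordiv v 2), (pvHeapMin x xs).2)]).map (fun p => -p.1)).Perm
              (insD (PySem.Int.floordiv v 2) vs)) := by
            rw [List.map_append]
            refine (List.perm_append_singleton _ _).trans ?_
            simp only [List.map_cons, List.map_nil, neg_neg]
            exact ((hrestperm.cons _).trans (insD_perm _ vs).symm)
          have hnodupnew : ((((x :: xs).erase (pvHeapMin x xs) ++
              [(-(PySem.Int.floordiv v 2), (pvHeapMin x xs).2)]).map Prod.snd)).Nodup := by
            rw [List.map_append]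
            refine ((List.perm_append_singleton _ _).nodup_iff).mpr ?_
            simp only [List.map_cons, List.map_nil]
            have h6 : ((pvHeapMin x xs :: (x :: xs).erase (pvHeapMin x xs)).map Prod.snd).Nodup :=
              ((hpe.map Prod.snd).nodup_iff).mp hnodup
            simpa using h6
          have hposnew : 0 < t - 1 → H = 1 → ∀ y ∈ insD (PySem.Int.floordiv v 2) vs, 1 ≤ y := by
            intro _ hH1 y hy
            rcases List.mem_cons.mp ((insD_perm _ vs).mem_iff.mp hy) with rfl | hy2
            · omega
            · exact hpos (by omega) hH1 y (List.mem_cons_of_mem _ hy2)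
          have hwitnew : 0 < t - 1 → ∃ y ∈ insD (PySem.Int.floordiv v 2) vs, -H < y := by
            intro _
            exact ⟨PySem.Int.floordiv v 2, (insD_perm _ vs).mem_iff.mpr (by simp), by omega⟩
          have hdescnew : (insD (PySem.Int.floordiv v 2) vs).Pairwise (fun a b => b ≤ a) :=
            insD_desc _ _ (List.pairwise_cons.mp hdesc).2
          by_cases hfdH : PySem.Int.floordiv v 2 < H
          · rw [if_pos hfdH]
            have hleftnew : ∀ i, i ∈ PySem.Set.discard left (pvHeapMin x xs).2 ↔
                ∃ q ∈ (x :: xs).erase (pvHeapMin x xs) ++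
                  [(-(PySem.Int.floordiv v 2), (pvHeapMin x xs).2)], q.2 = i ∧ H ≤ -q.1 := by
              intro i
              rw [PySem.Set.mem_discard, hleft i]
              constructor
              · rintro ⟨⟨q, hq, rfl, hH2⟩, hne2⟩
                have hqp : q ≠ pvHeapMin x xs := fun h => hne2 (by rw [h])
                exact ⟨q, List.mem_append_left _ ((List.mem_erase_of_ne hqp).mpr hq), rfl, hH2⟩
              · rintro ⟨q, hq, rfl, hH2⟩
                rcases List.mem_append.mp hq with hq2 | hq2
                · exact ⟨⟨q, List.mem_of_mem_erase hq2, rfl, hH2⟩, hsndfresh q hq2⟩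
                · simp at hq2
                  rw [hq2] at hH2
                  simp at hH2
                  omega
            by_cases hemp : PySem.Set.discard left (pvHeapMin x xs).2 = []
            · rw [if_pos hemp]
              have hallH : ∀ q ∈ (x :: xs).erase (pvHeapMin x xs) ++
                  [(-(PySem.Int.floordiv v 2), (pvHeapMin x xs).2)], -q.1 < H := by
                intro q hq
                by_contra hge
                have hmem2 : q.2 ∈ PySem.Set.discard left (pvHeapMin x xs).2 :=
                  (hleftnew q.2).mpr ⟨q, hq, rfl, by omega⟩
                rw [hemp] at hmem2
                simp at hmem2
              rw [out_true H _ (t - 1) (by simp) hallH]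
              obtain ⟨w, ws, hi⟩ : ∃ w ws, insD (PySem.Int.floordiv v 2) vs = w :: ws := by
                cases hi : insD (PySem.Int.floordiv v 2) vs with
                | nil => exact absurd hi (insD_ne_nil _ _)
                | cons w ws => exact ⟨w, ws, rfl⟩
              have hwH : w < H := by
                have hwmem : w ∈ insD (PySem.Int.floordiv v 2) vs := by rw [hi]; simp
                obtain ⟨q, hq, hqw⟩ := List.mem_map.mp (hpermnew.mem_iff.mpr hwmem)
                have := hallH q hq
                omega
              rw [hi, loopM]
              by_cases htm : t - 1 ≤ 0
              · rw [if_pos htm]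
                simp [outM, hwH]
              · rw [if_neg htm, if_pos hwH]
                simp [outM, hwH]
            · rw [if_neg hemp]
              exact ih (t - 1) htn' _ _ _ (insD_ne_nil _ _) hdescnew (fun _ => hH) hposnew
                hwitnew hpermnew hnodupnew hleftnew
          · rw [if_neg hfdH]
            have hleftnew : ∀ i, i ∈ left ↔
                ∃ q ∈ (x :: xs).erase (pvHeapMin x xs) ++
                  [(-(PySem.Int.floordiv v 2), (pvHeapMin x xs).2)], q.2 = i ∧ H ≤ -q.1 := by
              intro i
              rw [hleft i]
              constructor
              · rintro ⟨q, hq, rfl, hH2⟩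
                rcases List.mem_cons.mp (hpe.mem_iff.mp hq) with heq | hq2
                · refine ⟨(-(PySem.Int.floordiv v 2), (pvHeapMin x xs).2),
                    List.mem_append_right _ (by simp), by rw [heq], by simp; omega⟩
                · exact ⟨q, List.mem_append_left _ hq2, rfl, hH2⟩
              · rintro ⟨q, hq, rfl, hH2⟩
                rcases List.mem_append.mp hq with hq2 | hq2
                · exact ⟨q, List.mem_of_mem_erase hq2, rfl, hH2⟩
                · simp at hq2
                  rw [hq2]
                  exact ⟨pvHeapMin x xs, hpmem, rfl, by omega⟩
            by_cases hemp : left = []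
            · rw [if_pos hemp]
              have hallH : ∀ q ∈ (x :: xs).erase (pvHeapMin x xs) ++
                  [(-(PySem.Int.floordiv v 2), (pvHeapMin x xs).2)], -q.1 < H := by
                intro q hq
                by_contra hge
                have hmem2 : q.2 ∈ left := (hleftnew q.2).mpr ⟨q, hq, rfl, by omega⟩
                rw [hemp] at hmem2
                simp at hmem2
              rw [out_true H _ (t - 1) (by simp) hallH]
              obtain ⟨w, ws, hi⟩ : ∃ w ws, insD (PySem.Int.floordiv v 2) vs = w :: ws := by
                cases hi : insD (PySem.Int.floordiv v 2) vs with
                | nil => exact absurd hi (insD_ne_nil _ _)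
                | cons w ws => exact ⟨w, ws, rfl⟩
              have hwH : w < H := by
                have hwmem : w ∈ insD (PySem.Int.floordiv v 2) vs := by rw [hi]; simp
                obtain ⟨q, hq, hqw⟩ := List.mem_map.mp (hpermnew.mem_iff.mpr hwmem)
                have := hallH q hq
                omega
              rw [hi, loopM]
              by_cases htm : t - 1 ≤ 0
              · rw [if_pos htm]
                simp [outM, hwH]
              · rw [if_neg htm, if_pos hwH]
                simp [outM, hwH]
            · rw [if_neg hemp]
              exact ih (t - 1) htn' _ _ _ (insD_ne_nil _ _) hdescnew (fun _ => hH) hposnew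
                hwitnew hpermnew hnodupnew hleftnew


-- ---- initial state ----
theorem foldInit (H : Int) (l : List (Int × Int)) :
    ∀ (s : PySem.Set Int) (acc : List (Int × Int)),
    l.foldl (fun (st : PySem.Set Int × List (Int × Int)) p =>
        ((if H ≤ p.2 then PySem.Set.add st.1 p.1 else st.1), st.2 ++ [(-p.2, p.1)])) (s, acc)
      = (l.foldl (fun s p => if H ≤ p.2 then PySem.Set.add s p.1 else s) s,
         acc ++ l.map (fun p => (-p.2, p.1))) := by
  induction l with
  | nil => intro s acc; simp
  | cons p l ih =>
    intro s acc
    rw [List.foldl_cons, List.foldl_cons, ih]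
    simp


theorem mem_foldAdd (H : Int) (l : List (Int × Int)) :
    ∀ (s : PySem.Set Int) (i : Int),
    i ∈ l.foldl (fun s p => if H ≤ p.2 then PySem.Set.add s p.1 else s) s ↔
      i ∈ s ∨ ∃ p ∈ l, H ≤ p.2 ∧ p.1 = i := by
  induction l with
  | nil => intro s i; simp
  | cons p l ih =>
    intro s i
    rw [List.foldl_cons, ih]
    simp only [List.exists_mem_cons_iff]
    by_cases hp : H ≤ p.2
    · rw [if_pos hp, PySem.Set.mem_add]
      constructor
      · rintro ((hs | rfl) | hex)
        · exact Or.inl hs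
        · exact Or.inr (Or.inl ⟨hp, rfl⟩)
        · exact Or.inr (Or.inr hex)
      · rintro (hs | (⟨_, rfl⟩ | hex))
        · exact Or.inl (Or.inl hs)
        · exact Or.inl (Or.inr rfl)
        · exact Or.inr hex
    · rw [if_neg hp]
      constructor
      · rintro (hs | hex)
        · exact Or.inl hs
        · exact Or.inr (Or.inr hex)
      · rintro (hs | (⟨h2, _⟩ | hex))
        · exact Or.inl hs
        · exact absurd h2 hp
        · exact Or.inr hex


theorem render_eq (H T : Int) (rA : List (Int × Int) × Int) (sel t2 : Int)
    (h : outA H rA = some (if sel < H then (true, t2) else (false, sel))) :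
    (match PySem.List.max? (rA.1.map (fun p => -p.1)) (fun v => v) with
     | none => (("" : String), (0 : Int))
     | some mx => if mx < H then (("YES" : String), T - rA.2) else (("NO" : String), mx))
    = if sel < H then (("YES" : String), T - t2) else (("NO" : String), sel) := by
  unfold outA at h
  cases hmax : PySem.List.max? (rA.1.map (fun p => -p.1)) (fun v => v) with
  | none => rw [hmax] at h; simp at h
  | some mx =>
    rw [hmax] at h
    have h2 := Option.some.inj h
    dsimp only at h2
    dsimp only
    by_cases hmxH : mx < H <;> by_cases hselH : sel < H
    · rw [if_pos hmxH, if_pos hselH] at h2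
      simp only [Prod.mk.injEq, true_and] at h2
      rw [if_pos hmxH, if_pos hselH, h2]
    · rw [if_pos hmxH, if_neg hselH] at h2; simp at h2
    · rw [if_neg hmxH, if_pos hselH] at h2; simp at h2
    · rw [if_neg hmxH, if_neg hselH] at h2
      simp only [Prod.mk.injEq, true_and] at h2
      rw [if_neg hmxH, if_neg hselH, h2]

-- ===== VERDICT (by name: the statement is the Claim_ definition above) =====
theorem solution_spec : Claim_equal_solution := by
  unfold Claim_equal_solution
  intro N H T arr hdom hpre
  obtain ⟨hne, hcond⟩ := hpre
  have hHt0 : 0 < T → 1 ≤ H := fun h => (hcond (by omega)).1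
  unfold Spec_solution solution solution_alt
  rw [foldInit H (PySem.List.enumerate arr 0) PySem.Set.empty []]
  dsimp only
  simp only [List.nil_append]
  have hysne : PySem.List.sorted arr (fun v => v) true ≠ [] := by
    simp only [ne_eq, PySem.List.sorted_eq_nil_iff]
    exact hne
  have hdesc0 : (PySem.List.sorted arr (fun v => v) true).Pairwise (fun a b => b ≤ a) :=
    PySem.List.sorted_pairwise_rev arr (fun v => v)
  have hpos0 : 0 < T → H = 1 → ∀ v ∈ PySem.List.sorted arr (fun v => v) true, 1 ≤ v := by
    intro hT hH1 v hv
    rw [PySem.List.mem_sorted] at hv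
    exact (hcond (by omega)).2.1 hH1 v hv
  have hwit0 : 0 < T → ∃ y ∈ PySem.List.sorted arr (fun v => v) true, -H < y := by
    intro hT
    have h1 : ¬ ∀ v ∈ arr, v ≤ -H := (hcond (by omega)).2.2
    push_neg at h1
    obtain ⟨v, hv, hv2⟩ := h1
    exact ⟨v, by rw [PySem.List.mem_sorted]; exact hv, by omega⟩
  have hval0 : ((PySem.List.enumerate arr 0).map (fun p => ((-p.2 : Int), p.1))).map
      (fun p => -p.1) = arr := by
    rw [List.map_map]
    have hc : ((fun p : Int × Int => -p.1) ∘ fun p : Int × Int => ((-p.2 : Int), p.1))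
        = fun p : Int × Int => p.2 := by
      funext p
      simp
    rw [hc]
    exact PySem.List.map_snd_enumerate arr 0
  have hperm0 : (((PySem.List.enumerate arr 0).map (fun p => ((-p.2 : Int), p.1))).map
      (fun p => -p.1)).Perm (PySem.List.sorted arr (fun v => v) true) := by
    rw [hval0]
    exact (PySem.List.sorted_perm arr (fun v => v) true).symm
  have hnodup0 : (((PySem.List.enumerate arr 0).map (fun p => ((-p.2 : Int), p.1))).map
      Prod.snd).Nodup := by
    rw [List.map_map]
    have hc : (Prod.snd ∘ fun p : Int × Int => ((-p.2 : Int), p.1))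
        = fun p : Int × Int => p.1 := rfl
    rw [hc]
    have h2 : ((PySem.List.enumerate arr 0).map (fun p => p.1)).Pairwise (· < ·) :=
      List.pairwise_map.mpr (PySem.List.pairwise_lt_enumerate arr 0)
    exact h2.imp (fun h => ne_of_lt h)
  have hleftchar : ∀ i, i ∈ (PySem.List.enumerate arr 0).foldl
      (fun s p => if H ≤ p.2 then PySem.Set.add s p.1 else s) PySem.Set.empty ↔
      ∃ q ∈ (PySem.List.enumerate arr 0).map (fun p => ((-p.2 : Int), p.1)),
        q.2 = i ∧ H ≤ -q.1 := by
    intro i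
    rw [mem_foldAdd]
    constructor
    · rintro (h0 | ⟨p, hp, hp2, rfl⟩)
      · exact absurd h0 (by simp [PySem.Set.empty])
      · exact ⟨(-p.2, p.1), List.mem_map.mpr ⟨p, hp, rfl⟩, rfl, by simpa using hp2⟩
    · rintro ⟨q, hq, rfl, hH2⟩
      obtain ⟨p, hp, rfl⟩ := List.mem_map.mp hq
      exact Or.inr ⟨p, hp, by simpa using hH2, rfl⟩
  have hmain := loopA_sim H T.toNat T le_rfl
      ((PySem.List.enumerate arr 0).map (fun p => ((-p.2 : Int), p.1)))
      ((PySem.List.enumerate arr 0).foldl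
        (fun s p => if H ≤ p.2 then PySem.Set.add s p.1 else s) PySem.Set.empty)
      (PySem.List.sorted arr (fun v => v) true)
      hysne hdesc0 hHt0 hpos0 hwit0 hperm0 hnodup0 hleftchar
  have hsim := loopB_sim H (buildRL arr) [] T hHt0 (counts_buildRL arr) (by simp)
      (by rw [expand_buildRL]; exact hdesc0) (by simp [expandRL]) (by simp)
      (PySem.List.sorted arr (fun v => v) true)
      (by rw [expand_buildRL]; simp [expandRL]) hdesc0
  have hAB := hmain.trans hsim.symm
  cases hLB : loopB H (buildRL arr) [] T with
  | mk cur1 r2 =>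
  cases r2 with
  | mk nxt1 t1 =>
  rw [hLB] at hAB
  dsimp only
  cases cur1 with
  | nil =>
    cases nxt1 with
    | nil =>
      exfalso
      rw [hLB] at hsim
      have hnn := loopM_ne_nil H (PySem.List.sorted arr (fun v => v) true) T hysne
      unfold outB outM at hsim
      dsimp only at hsim
      rcases hL2 : (loopM H (PySem.List.sorted arr (fun v => v) true) T).1 with _ | ⟨w, ws⟩
      · exact hnn hL2
      · rw [hL2] at hsim
        simp at hsim
    | cons p2 nxt' =>
      obtain ⟨m2, c2⟩ := p2
      unfold outB at hAB
      dsimp only at hAB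
      rw [render_eq H T _ m2 t1 hAB]
  | cons p1 cur' =>
    obtain ⟨m, c⟩ := p1
    cases nxt1 with
    | nil =>
      unfold outB at hAB
      dsimp only at hAB
      rw [render_eq H T _ m t1 hAB]
    | cons p2 nxt' =>
      obtain ⟨m2, c2⟩ := p2
      unfold outB at hAB
      dsimp only at hAB
      by_cases hsel : m2 ≤ m
      · rw [if_pos hsel] at hAB
        rw [render_eq H T _ m t1 hAB]
        simp [hsel]
      · rw [if_neg hsel] at hAB
        rw [render_eq H T _ m2 t1 hAB]
        simp [hsel]
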